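-- pv_equiv track=rewrite | github.com/banderasz/practice | Staircase problem/Staircase problem.py | all_combs
-- ===== SOURCE A (Python) =====
-- def all_combs(X, N):
--     options = set()
--     maxstep = N // min(X)
--     allist = list()
--
--     def combs(a):
--         if len(a) == 0:
--             return [[]]
--         cs = []
--         for c in combs(a[1:]):
--             if (len(c)) < maxstep and (sum(c) <= N):
--                 cs += [c, c + [a[0]]]
--         return cs
--
--     for i in range(maxstep):
--         for element in X:
--             allist.append(element)
--
--     cs = combs(list(allist))
--
--     cs = [list(x) for x in set(tuple(x) for x in cs)]
--     for comb in cs: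
--         if isinstance(comb, list):
--             if sum(comb) == N:
--                 local = tuple([*comb])
--                 options.add(local)
--         else:
--             if comb == N:
--                 options.add(str(comb))
--     return options
-- ===== SOURCE B (Python) =====
-- def all_combs(X, N):
--     # Iterative enumeration over the pool of available steps (each step value can
--     # be used at most maxstep times): a partial sequence is extended at position j
--     # only when no equal step value occurs between its previously used position
--     # and j, so every step sequence is generated exactly once, at its leftmost
--     # embedding into the pool, and no deduplication pass is needed.
--     maxstep = N // min(X)
--     pool = X * maxstep
--     entries = [((), -1)]
--     for j in range(len(pool)):
--         v = pool[j]
--         entries += [((v,) + t, j) for (t, last) in entries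
--                     if len(t) < maxstep and sum(t) <= N and v not in pool[last + 1: j]]
--     return {t for (t, _) in entries if sum(t) == N}
-- ===== Notes on version B (the rewrite author's own statement) =====
-- stated objective: alternative
-- what changed: A recursively enumerates the subsequences of X repeated maxstep times (each step sequence appears once per embedding) and deduplicates through a set afterwards; B iterates once over the positions of that pool and extends a partial sequence at a position only when it is the leftmost possible one for that step value, so each sequence is generated exactly once and no dedup pass exists.
-- intended difference: On inputs with positive steps admitting a composition of N of maximal length N//min(X) whose last step differs from X[0], A silently omits every such maximal-length composition (its recursion can only keep a maximal-length tuple built at the outermost call), while B returns the complete set of compositions, which is the intended 'all combinations of steps'. — e.g. on all_combs([2, 1], 2): A returns [[2]], B returns [[2], [1, 1]]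
import Mathlib
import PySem

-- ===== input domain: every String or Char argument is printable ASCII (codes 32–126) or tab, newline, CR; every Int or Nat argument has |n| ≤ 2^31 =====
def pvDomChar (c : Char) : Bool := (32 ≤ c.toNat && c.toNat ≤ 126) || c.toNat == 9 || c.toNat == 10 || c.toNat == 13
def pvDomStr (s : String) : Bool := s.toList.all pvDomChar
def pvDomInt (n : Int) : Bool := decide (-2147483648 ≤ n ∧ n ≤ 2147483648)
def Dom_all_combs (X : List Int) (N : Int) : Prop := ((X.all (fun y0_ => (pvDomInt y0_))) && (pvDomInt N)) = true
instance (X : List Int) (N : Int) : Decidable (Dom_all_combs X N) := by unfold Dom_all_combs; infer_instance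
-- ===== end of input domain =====

-- B replaces A's enumeration of all subsequences of X*maxstep (deduplicated through a
-- set at the end) by a single pass that extends each partial sequence only at the
-- leftmost position carrying its next step value, generating every sequence once.

-- ===== PORT A =====
-- helper: the inner recursive function combs(a) of A, with maxstep and N in scope
def combsA (q N : Int) : List Int → List (List Int)
  | [] => [[]]
  | h :: tl => (combsA q N tl).foldl
      (fun cs c => if (c.length : Int) < q ∧ c.sum ≤ N then cs ++ [c, c ++ [h]] else cs) []

def all_combs (X : List Int) (N : Int) : List (List Int) :=
  match PySem.List.min? X (fun x => x) with
  | none => []      -- min([]) raises ValueError (excluded by Pre_)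
  | some mn =>
    -- N // 0 raises ZeroDivisionError in Python when mn = 0 (excluded by Pre_)
    let maxstep := PySem.Int.floordiv N mn
    let allist := (PySem.List.pyRange 0 maxstep 1).foldl
        (fun al _i => X.foldl (fun al e => al ++ [e]) al) []
    let cs := combsA maxstep N allist
    let csd := PySem.Set.ofList cs   -- set(tuple(x) for x in cs), then [list(x) for x in …]
    -- every comb is a list, so only the isinstance-list branch of the final loop is live
    csd.foldl (fun options comb =>
        if comb.sum = N then PySem.Set.add options comb else options) PySem.Set.empty

-- ===== PORT B =====
def all_combs_alt (X : List Int) (N : Int) : List (List Int) :=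
  match PySem.List.min? X (fun x => x) with
  | none => []      -- min([]) raises ValueError (excluded by Pre_)
  | some mn =>
    let maxstep := PySem.Int.floordiv N mn
    -- pool = X * maxstep: Python list repetition (empty for maxstep ≤ 0); exact
    let pool := (List.replicate maxstep.toNat X).flatten
    let entries := (PySem.List.pyRange 0 ((pool.length : Nat) : Int) 1).foldl
      (fun entries j =>
        let v := PySem.List.pyGetD pool j 0
        entries ++ (entries.filter (fun (p : List Int × Int) =>
            decide ((p.1.length : Int) < maxstep ∧ p.1.sum ≤ N) &&
            !((PySem.List.slice pool (some (p.2 + 1)) (some j)).contains v))).map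
          (fun p => (v :: p.1, j)))
      [(([] : List Int), (-1 : Int))]
    PySem.Set.ofList ((entries.filter (fun p => decide (p.1.sum = N))).map (fun p => p.1))

-- ===== PRECONDITION & SPEC =====
-- can some ≤ k positive surpluses drawn (with repetition) from gs add up to t?
def pvFill (gs : List Int) (k t : Int) : Bool :=
  match gs with
  | [] => t == 0
  | g :: gs' =>
      if t == 0 then true
      else if t > k * ((g :: gs').foldr max 0) then false
      else if g ≤ 0 ∨ t < g ∨ k ≤ 0 then pvFill gs' k t
      else pvFill gs' k t || pvFill (g :: gs') (k - 1) (t - g)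
termination_by (gs.length, t.toNat)


def pvBad (X : List Int) (N : Int) : Bool :=
  (PySem.List.min? X (fun x => x)).elim false fun m =>
    decide (0 < m) && decide (m ≤ N) && X.any fun y =>
      decide (y ≠ X.headI) &&
      pvFill (X.map (fun x => x - m)) (PySem.Int.floordiv N m - 1) (PySem.Int.mod N m - (y - m))

-- Pre_ excludes exactly the inputs on which Python A raises: empty X (min([]) is a
-- ValueError) and min(X) = 0 (N // 0 is a ZeroDivisionError).
def Pre_all_combs (X : List Int) (N : Int) : Prop :=
  X ≠ [] ∧ PySem.List.min? X (fun x => x) ≠ some 0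
instance (X : List Int) (N : Int) : Decidable (Pre_all_combs X N) := by
  unfold Pre_all_combs; infer_instance

def pvWitness_all_combs : List Int × Int := ([1, 2], 3)

-- On inputs with positive steps admitting a composition of N of maximal length
-- N//min(X) whose last step differs from X[0], A silently omits every such
-- maximal-length composition, while B returns the complete set of compositions,
-- which is the intended "all combinations of steps".
def D_all_combs (X : List Int) (N : Int) : Prop :=
  ∃ m ∈ PySem.List.min? X (fun x => x), 0 < m ∧ m ≤ N ∧ ∃ d : List Int,
    (∀ v ∈ d, v ∈ X) ∧ (d.length : Int) = PySem.Int.floordiv N m ∧ d.sum = N ∧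
    d.getLast? ≠ X.head?

-- the instance decides D_ through the bounded search pvBad; the inline proof shows
-- pvBad X N = true ↔ D_all_combs X N
instance pvDecD_all_combs (X : List Int) (N : Int) : Decidable (D_all_combs X N) := by
  apply decidable_of_iff (pvBad X N = true)
  have pvFillIff : ∀ (gs : List Int) (k t : Int), 0 ≤ k →
      (pvFill gs k t = true ↔
        ∃ l : List Int, (∀ g' ∈ l, g' ∈ gs ∧ 0 < g') ∧ (l.length : Int) ≤ k ∧ l.sum = t) := by
    intro gs k t
    induction gs, k, t using pvFill.induct with
    | case1 k t =>
      intro hk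
      rw [pvFill]
      simp only [beq_iff_eq]
      constructor
      · rintro rfl
        exact ⟨[], by simp, by simpa using hk, by simp⟩
      · rintro ⟨l, hl, _, hsum⟩
        cases l with
        | nil => simpa using hsum.symm
        | cons a l' => exact absurd (hl a (by simp)).1 (by simp)
    | case2 k t g gs' ht0 =>
      intro hk
      rw [pvFill, if_pos ht0]
      have ht : t = 0 := by simpa using ht0
      refine ⟨fun _ => ?_, fun _ => rfl⟩
      exact ⟨[], by simp, by simpa using hk, by simp [ht]⟩
    | case3 k t g gs' ht0 hpr =>
      intro hk
      rw [pvFill, if_neg ht0, if_pos hpr]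
      simp only [Bool.false_eq_true, false_iff]
      rintro ⟨l, hl, hlen, hsum⟩
      have hmaxgen : ∀ (Y : List Int) (g' : Int), g' ∈ Y → g' ≤ Y.foldr max 0 := by
        intro Y
        induction Y with
        | nil => intro g' hg'; simp at hg'
        | cons a tl ih =>
          intro g' hg'
          rcases List.mem_cons.1 hg' with rfl | h
          · exact le_max_left _ _
          · exact le_trans (ih g' h) (le_max_right _ _)
      have hmax0gen : ∀ (Y : List Int), 0 ≤ Y.foldr max 0 := by
        intro Y
        induction Y with
        | nil => simp
        | cons a tl ih => exact le_trans ih (le_max_right _ _)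
      have hmax : ∀ g' ∈ (g :: gs'), g' ≤ (g :: gs').foldr max 0 := fun g' h => hmaxgen _ g' h
      have hmax0 : 0 ≤ (g :: gs').foldr max 0 := hmax0gen _
      have hsle : l.sum ≤ (l.length : Int) * ((g :: gs').foldr max 0) := by
        have := List.sum_le_card_nsmul l ((g :: gs').foldr max 0)
          (fun x hx => hmax x (hl x hx).1)
        simpa [nsmul_eq_mul] using this
      nlinarith [hsum, hsle, hlen, hmax0]
    | case4 k t g gs' ht0 hpr hsk ih =>
      intro hk
      rw [pvFill, if_neg ht0, if_neg hpr, if_pos hsk]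
      rw [ih hk]
      constructor
      · rintro ⟨l, hl, hlen, hsum⟩
        exact ⟨l, fun g' hg' => ⟨List.mem_cons_of_mem _ (hl g' hg').1, (hl g' hg').2⟩, hlen, hsum⟩
      · rintro ⟨l, hl, hlen, hsum⟩
        refine ⟨l, ?_, hlen, hsum⟩
        intro g' hg'
        obtain ⟨hmem, hpos⟩ := hl g' hg'
        rcases List.mem_cons.1 hmem with rfl | h
        · exfalso
          rcases hsk with h1 | h1 | h1
          · omega
          · -- t < g but g ∈ l: sum ≥ g
            have hrest : 0 ≤ (l.erase g').sum := by
              apply List.sum_nonneg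
              intro x hx
              exact le_of_lt (hl x (List.mem_of_mem_erase hx)).2
            have hperm : l.sum = g' + (l.erase g').sum := by
              have := (List.perm_cons_erase hg').sum_eq
              simpa using this
            omega
          · have : 1 ≤ l.length := by
              cases l with
              | nil => simp at hg'
              | cons a b => simp
            have : (1 : Int) ≤ (l.length : Int) := by exact_mod_cast this
            omega
        · exact ⟨h, hpos⟩
    | case5 k t g gs' ht0 hpr hsk ih1 ih2 =>
      intro hk
      push_neg at hsk
      obtain ⟨hg, htg, hk1⟩ := hsk
      rw [pvFill, if_neg ht0, if_neg hpr, if_neg (by push_neg; exact ⟨hg, htg, hk1⟩)]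
      rw [Bool.or_eq_true_iff, ih1 hk, ih2 (by omega)]
      constructor
      · rintro (⟨l, hl, hlen, hsum⟩ | ⟨l, hl, hlen, hsum⟩)
        · exact ⟨l, fun g' hg' => ⟨List.mem_cons_of_mem _ (hl g' hg').1, (hl g' hg').2⟩, hlen, hsum⟩
        · refine ⟨g :: l, ?_, ?_, ?_⟩
          · intro g' hg'
            rcases List.mem_cons.1 hg' with rfl | h
            · exact ⟨List.mem_cons_self, by omega⟩
            · exact hl g' h
          · simp only [List.length_cons]; push_cast; omega
          · simp only [List.sum_cons]; omega
      · rintro ⟨l, hl, hlen, hsum⟩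
        by_cases hgl : g ∈ l
        · right
          refine ⟨l.erase g, ?_, ?_, ?_⟩
          · intro g' hg'
            exact hl g' (List.mem_of_mem_erase hg')
          · have h1 := List.length_erase_of_mem hgl
            have h2 : 1 ≤ l.length := by
              cases l with
              | nil => simp at hgl
              | cons a b => simp
            rw [h1]
            push_cast
            omega
          · have := (List.perm_cons_erase hgl).sum_eq
            simp at this
            omega
        · left
          refine ⟨l, ?_, hlen, hsum⟩
          intro g' hg'
          obtain ⟨hmem, hpos⟩ := hl g' hg'
          rcases List.mem_cons.1 hmem with rfl | h
          · exact absurd hg' hgl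
          · exact ⟨h, hpos⟩
  have hmapsum : ∀ (m : Int) (l : List Int),
      (l.map (fun x => x - m)).sum = l.sum - (l.length : Int) * m := by
    intro m l
    induction l with
    | nil => simp
    | cons a tl ih =>
      simp only [List.map_cons, List.sum_cons, List.length_cons, ih]
      push_cast
      ring
  constructor
  · intro hb
    cases hmn : PySem.List.min? X (fun x => x) with
    | none =>
      unfold pvBad at hb
      rw [hmn] at hb
      simp at hb
    | some m =>
      unfold pvBad at hb
      rw [hmn] at hb
      simp only [Option.elim, Bool.and_eq_true, decide_eq_true_eq] at hb
      obtain ⟨⟨hm0, hmN⟩, hany⟩ := hb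
      obtain ⟨y, hyX, hy⟩ := List.any_eq_true.1 hany
      rw [Bool.and_eq_true, decide_eq_true_eq] at hy
      obtain ⟨hyh, hfill⟩ := hy
      have hdm := PySem.Int.floordiv_mul_add_mod N m
      have hq1 : 1 ≤ PySem.Int.floordiv N m := by
        have h1 : (1 : Int) * m ≤ N := by omega
        exact (PySem.Int.le_floordiv_iff_mul_le hm0).2 h1
      obtain ⟨l, hl, hlen, hsum⟩ := (pvFillIff (X.map (fun x => x - m))
        (PySem.Int.floordiv N m - 1) (PySem.Int.mod N m - (y - m)) (by omega)).1 hfill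
      -- replace each gap by a concrete step of X
      have hsteps : ∀ (l' : List Int), (∀ g' ∈ l', g' ∈ X.map (fun x => x - m)) →
          ∃ lx : List Int, (∀ v ∈ lx, v ∈ X) ∧ lx.length = l'.length ∧
            lx.sum = l'.sum + (l'.length : Int) * m := by
        intro l'
        induction l' with
        | nil => intro _; exact ⟨[], by simp, by simp, by simp⟩
        | cons a tl ih =>
          intro hmem
          obtain ⟨lx, h1, h2, h3⟩ := ih (fun g' hg' => hmem g' (List.mem_cons_of_mem _ hg'))
          obtain ⟨x, hxX, hxa⟩ := List.mem_map.1 (hmem a (by simp))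
          refine ⟨x :: lx, ?_, by simp [h2], ?_⟩
          · intro v hv
            rcases List.mem_cons.1 hv with rfl | h
            · exact hxX
            · exact h1 v h
          · simp only [List.sum_cons, List.length_cons]
            rw [h3]
            have hx : x = a + m := by omega
            rw [hx]
            push_cast
            ring
      obtain ⟨lx, hlxX, hlxlen, hlxsum⟩ := hsteps l (fun g' hg' => (hl g' hg').1)
      have hlt : lx.sum - (lx.length : Int) * m = PySem.Int.mod N m - (y - m) := by
        rw [hlxlen, hlxsum]
        omega
      have hlk : (lx.length : Int) ≤ PySem.Int.floordiv N m - 1 := by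
        rw [hlxlen]; exact hlen
      have hmX : m ∈ X := PySem.List.min?_mem hmn
      refine ⟨m, Option.mem_def.2 hmn, hm0, hmN,
        lx ++ List.replicate ((PySem.Int.floordiv N m - 1).toNat - lx.length) m ++ [y],
        ?_, ?_, ?_, ?_⟩
      · intro v hv
        rcases List.mem_append.1 hv with h | h
        · rcases List.mem_append.1 h with h2 | h2
          · exact hlxX v h2
          · rw [List.eq_of_mem_replicate h2]; exact hmX
        · rw [List.mem_singleton.1 h]; exact hyX
      · simp only [List.length_append, List.length_replicate, List.length_cons,
          List.length_nil]
        push_cast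
        omega
      · simp only [List.sum_append, List.sum_replicate, List.sum_cons, List.sum_nil,
          nsmul_eq_mul]
        have hpc : ((((PySem.Int.floordiv N m - 1).toNat - lx.length) : Nat) : Int)
            = PySem.Int.floordiv N m - 1 - (lx.length : Int) := by
          push_cast
          omega
        have hmod : PySem.Int.mod N m = N - PySem.Int.floordiv N m * m := by
          linarith [hdm]
        rw [hpc]
        rw [hmod] at hlt
        nlinarith [hlt]
      · have hlast : (lx ++ List.replicate ((PySem.Int.floordiv N m - 1).toNat - lx.length) m
            ++ [y]).getLast? = some y := by simp
        rw [hlast]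
        obtain ⟨x₀, X', hX0⟩ : ∃ x₀ X', X = x₀ :: X' := by
          cases X with
          | nil => simp at hmX
          | cons a b => exact ⟨a, b, rfl⟩
        rw [hX0, List.head?_cons]
        intro he
        apply hyh
        rw [hX0]
        simpa using he
  · intro hd
    obtain ⟨m, hmem, hm0, hmN, d, hvals, hlen, hsum, hlast⟩ := hd
    have hmn : PySem.List.min? X (fun x => x) = some m := Option.mem_def.1 hmem
    have hposX : ∀ v ∈ X, m ≤ v := fun v hv => PySem.List.min?_isMin hmn v hv
    unfold pvBad
    rw [hmn]
    simp only [Option.elim, Bool.and_eq_true, decide_eq_true_eq]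
    refine ⟨⟨hm0, hmN⟩, ?_⟩
    have hdm := PySem.Int.floordiv_mul_add_mod N m
    have hq1 : 1 ≤ PySem.Int.floordiv N m := by
      have h1 : (1 : Int) * m ≤ N := by omega
      exact (PySem.Int.le_floordiv_iff_mul_le hm0).2 h1
    have hne : d ≠ [] := by
      intro h
      rw [h] at hlen
      simp at hlen
      omega
    obtain ⟨y, r0, hdr⟩ : ∃ y r0, d.reverse = y :: r0 := by
      cases h : d.reverse with
      | nil => exact absurd (by simpa using congrArg List.reverse h) hne
      | cons y r0 => exact ⟨y, r0, rfl⟩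
    have hdecomp : d = r0.reverse ++ [y] := by
      have := congrArg List.reverse hdr
      simpa using this
    have hyX : y ∈ X := hvals y (by rw [hdecomp]; simp)
    have hylast : d.getLast? = some y := by rw [hdecomp]; simp
    obtain ⟨x₀, X', hX0⟩ : ∃ x₀ X', X = x₀ :: X' := by
      cases X with
      | nil => simp at hyX
      | cons a b => exact ⟨a, b, rfl⟩
    apply List.any_eq_true.2
    refine ⟨y, hyX, ?_⟩
    rw [Bool.and_eq_true, decide_eq_true_eq]
    constructor
    · intro he
      apply hlast
      rw [hylast, hX0, List.head?_cons, he, hX0]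
      rfl
    · have hlvals : ∀ v ∈ r0.reverse, v ∈ X :=
        fun v hv => hvals v (by rw [hdecomp]; exact List.mem_append.2 (Or.inl hv))
      have hlend : d.length = r0.reverse.length + 1 := by rw [hdecomp]; simp
      have hsuml : r0.reverse.sum = N - y := by
        have : d.sum = r0.reverse.sum + y := by rw [hdecomp]; simp
        omega
      have hlc : ((r0.reverse.length : Nat) : Int) = PySem.Int.floordiv N m - 1 := by
        have : (d.length : Int) = (r0.reverse.length : Int) + 1 := by
          rw [hlend]; push_cast; ring
        omega
      apply (pvFillIff (X.map (fun x => x - m)) (PySem.Int.floordiv N m - 1)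
        (PySem.Int.mod N m - (y - m)) (by omega)).2
      have hfilsum : ∀ (gl : List Int), (∀ g' ∈ gl, 0 ≤ g') →
          (gl.filter (fun g => decide (0 < g))).sum = gl.sum := by
        intro gl
        induction gl with
        | nil => intro _; simp
        | cons a tl ih =>
          intro hge
          have ha := hge a (by simp)
          have := ih (fun g' hg' => hge g' (List.mem_cons_of_mem _ hg'))
          by_cases h0 : 0 < a
          · rw [List.filter_cons_of_pos (by simpa using h0)]
            simp [this]
          · rw [List.filter_cons_of_neg (by simpa using h0)]
            have ha0 : a = 0 := by omega
            simp [this, ha0]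
      refine ⟨(r0.reverse.map (fun x => x - m)).filter (fun g => decide (0 < g)), ?_, ?_, ?_⟩
      · intro g' hg'
        obtain ⟨hg1, hg2⟩ := List.mem_filter.1 hg'
        refine ⟨?_, by simpa using hg2⟩
        obtain ⟨x, hx1, hx2⟩ := List.mem_map.1 hg1
        exact List.mem_map.2 ⟨x, hlvals x hx1, hx2⟩
      · calc (((r0.reverse.map (fun x => x - m)).filter (fun g => decide (0 < g))).length : Int)
            ≤ ((r0.reverse.map (fun x => x - m)).length : Int) := by
              exact_mod_cast (List.length_filter_le _ _)
          _ = (r0.reverse.length : Int) := by simp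
          _ = PySem.Int.floordiv N m - 1 := hlc
      · rw [hfilsum _ (by
          intro g' hg'
          obtain ⟨x, hx1, hx2⟩ := List.mem_map.1 hg'
          have := hposX x (hlvals x hx1)
          omega)]
        rw [hmapsum m r0.reverse, hsuml, hlc]
        have hmod : PySem.Int.mod N m = N - PySem.Int.floordiv N m * m := by
          linarith [hdm]
        rw [hmod]
        ring

def Spec_all_combs (X : List Int) (N : Int) (out : List (List Int)) : Prop :=
  ¬ D_all_combs X N → out = all_combs_alt X N
instance (X : List Int) (N : Int) (out : List (List Int)) : Decidable (Spec_all_combs X N out) := by unfold Spec_all_combs; infer_instance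

def pvDiffWitness_all_combs : List Int × Int := ([2, 1], 2)
def pvDiffWitnessOut_all_combs : (List (List Int)) × (List (List Int)) :=
  ([[2]], [[2], [1, 1]])

-- ===== CLAIM (what is proved, stated in full; the proofs are below) =====
def Claim_unchanged_all_combs : Prop := ∀ (X : List Int) (N : Int), Dom_all_combs X N → Pre_all_combs X N → Spec_all_combs X N (all_combs X N)
def Claim_changed_all_combs : Prop := Dom_all_combs (pvDiffWitness_all_combs.1) (pvDiffWitness_all_combs.2) ∧ Pre_all_combs (pvDiffWitness_all_combs.1) (pvDiffWitness_all_combs.2) ∧ D_all_combs (pvDiffWitness_all_combs.1) (pvDiffWitness_all_combs.2) ∧ all_combs (pvDiffWitness_all_combs.1) (pvDiffWitness_all_combs.2) = pvDiffWitnessOut_all_combs.1 ∧ all_combs_alt (pvDiffWitness_all_combs.1) (pvDiffWitness_all_combs.2) = pvDiffWitnessOut_all_combs.2 ∧ pvDiffWitnessOut_all_combs.1 ≠ pvDiffWitnessOut_all_combs.2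
def Claim_exact_all_combs : Prop := ∀ (X : List Int) (N : Int), Dom_all_combs X N → Pre_all_combs X N → D_all_combs X N → all_combs X N ≠ all_combs_alt X N

-- ===== LEMMAS AND PROOFS =====

-- ---------- generic list lemmas ----------

theorem pvKeyext {α : Type} (key : α → Nat) :
    ∀ (l1 l2 : List α), l1.Pairwise (fun x y => key x < key y) →
      l2.Pairwise (fun x y => key x < key y) → (∀ x, x ∈ l1 ↔ x ∈ l2) → l1 = l2 := by
  intro l1
  induction l1 with
  | nil =>
    intro l2 _ _ hm
    cases l2 with
    | nil => rfl
    | cons a t2 => exact absurd ((hm a).2 (by simp)) (by simp)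
  | cons x t1 ih =>
    intro l2 h1 h2 hm
    cases l2 with
    | nil => exact absurd ((hm x).1 (by simp)) (by simp)
    | cons a t2 =>
      have hx : x ∈ a :: t2 := (hm x).1 (by simp)
      have ha : a ∈ x :: t1 := (hm a).2 (by simp)
      have hxa : x = a := by
        rcases List.mem_cons.1 hx with h | hxt2
        · exact h
        rcases List.mem_cons.1 ha with h | hat1
        · exact h.symm
        · exfalso
          have hA := (List.pairwise_cons.1 h1).1 a hat1
          have hB := (List.pairwise_cons.1 h2).1 x hxt2
          omega
      subst hxa
      have htm : ∀ y, y ∈ t1 ↔ y ∈ t2 := by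
        intro y
        constructor
        · intro hy
          have hkey := (List.pairwise_cons.1 h1).1 y hy
          rcases List.mem_cons.1 ((hm y).1 (List.mem_cons_of_mem _ hy)) with h | h
          · exfalso; subst h; omega
          · exact h
        · intro hy
          have hkey := (List.pairwise_cons.1 h2).1 y hy
          rcases List.mem_cons.1 ((hm y).2 (List.mem_cons_of_mem _ hy)) with h | h
          · exfalso; subst h; omega
          · exact h
      rw [ih t2 (List.pairwise_cons.1 h1).2 (List.pairwise_cons.1 h2).2 htm]

theorem pvSumSublistLe : ∀ {s d : List Int}, s.Sublist d → (∀ v ∈ d, 0 ≤ v) → s.sum ≤ d.sum := by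
  intro s d h
  induction h with
  | slnil => intro _; simp
  | cons a h ih =>
    intro hp
    have := ih (fun v hv => hp v (List.mem_cons_of_mem _ hv))
    have := hp a (by simp)
    simp only [List.sum_cons]; omega
  | cons₂ a h ih =>
    intro hp
    have := ih (fun v hv => hp v (List.mem_cons_of_mem _ hv))
    simp only [List.sum_cons]; omega

theorem pvSumGe (mn : Int) : ∀ (d : List Int), (∀ v ∈ d, mn ≤ v) → (d.length : Int) * mn ≤ d.sum := by
  intro d
  induction d with
  | nil => intro _; simp
  | cons v t ih =>
    intro h
    have h1 := h v (by simp)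
    have h2 := ih (fun w hw => h w (List.mem_cons_of_mem _ hw))
    simp only [List.length_cons, List.sum_cons]
    push_cast
    nlinarith

-- ---------- PySem.Set helper lemmas (first-occurrence deduplication) ----------

theorem pvAddMem (s : List (List Int)) (x : List Int) (h : x ∈ s) : PySem.Set.add s x = s := by
  simp [PySem.Set.add, PySem.Set.contains, List.contains_eq_mem, h]

theorem pvAddNotMem (s : List (List Int)) (x : List Int) (h : x ∉ s) : PySem.Set.add s x = s ++ [x] := by
  simp [PySem.Set.add, PySem.Set.contains, List.contains_eq_mem, h]

theorem pvFoldlAdd : ∀ (l s : List (List Int)),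
    List.foldl PySem.Set.add s l = s ++ (PySem.Set.ofList l).filter (fun y => decide (y ∉ s)) := by
  intro l
  induction l with
  | nil => intro s; simp [PySem.Set.ofList]
  | cons x t ih =>
    intro s
    show List.foldl PySem.Set.add (PySem.Set.add s x) t = _
    rw [ih (PySem.Set.add s x)]
    have hof : PySem.Set.ofList (x :: t) = List.foldl PySem.Set.add (PySem.Set.add PySem.Set.empty x) t := rfl
    rw [hof, ih (PySem.Set.add PySem.Set.empty x)]
    have hemp : PySem.Set.add PySem.Set.empty x = [x] := pvAddNotMem [] x (by simp)
    rw [hemp]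
    rw [List.filter_append]
    by_cases hxs : x ∈ s
    · rw [pvAddMem s x hxs]
      have h1 : ([x] : List (List Int)).filter (fun y => decide (y ∉ s)) = [] := by
        simp [hxs]
      rw [h1, List.nil_append, List.filter_filter]
      congr 1
      apply List.filter_congr
      intro y hy
      by_cases hyx : y = x <;> by_cases hys : y ∈ s <;> simp_all
    · rw [pvAddNotMem s x hxs]
      have h1 : ([x] : List (List Int)).filter (fun y => decide (y ∉ s)) = [x] := by
        simp [hxs]
      rw [h1, List.filter_filter, List.append_assoc]
      congr 1
      show _ = [x] ++ _
      congr 1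
      apply List.filter_congr
      intro y hy
      by_cases hyx : y = x <;> by_cases hys : y ∈ s <;> simp_all

theorem pvOfListCons (x : List Int) (l : List (List Int)) :
    PySem.Set.ofList (x :: l) = x :: (PySem.Set.ofList l).filter (fun y => decide (y ≠ x)) := by
  have h1 : PySem.Set.ofList (x :: l) = List.foldl PySem.Set.add PySem.Set.empty (x :: l) := rfl
  rw [h1]
  show List.foldl PySem.Set.add (PySem.Set.add PySem.Set.empty x) l = _
  have hemp : PySem.Set.add PySem.Set.empty x = [x] := pvAddNotMem [] x (by simp)
  rw [hemp, pvFoldlAdd]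
  show [x] ++ _ = x :: _
  rw [List.singleton_append]
  congr 1
  apply List.filter_congr
  intro y _
  simp

theorem pvOfListFilter (p : List Int → Bool) : ∀ (l : List (List Int)),
    PySem.Set.ofList (l.filter p) = (PySem.Set.ofList l).filter p := by
  intro l
  induction l with
  | nil => simp [PySem.Set.ofList]
  | cons x t ih =>
    rw [pvOfListCons]
    by_cases hx : p x
    · rw [List.filter_cons_of_pos hx, pvOfListCons, ih]
      simp only [List.filter_cons_of_pos hx, List.filter_filter]
      congr 1
      · apply List.filter_congr
        intro y _
        by_cases h1 : p y <;> by_cases h2 : y = x <;> simp_all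
    · rw [List.filter_cons_of_neg hx, ih]
      simp only [List.filter_cons_of_neg hx, List.filter_filter]
      apply List.filter_congr
      intro y _
      by_cases h1 : p y <;> by_cases h2 : y = x <;> simp_all

theorem pvOfListId : ∀ (l : List (List Int)), l.Nodup → PySem.Set.ofList l = l := by
  intro l
  induction l with
  | nil => intro _; simp [PySem.Set.ofList]
  | cons x t ih =>
    intro h
    rw [pvOfListCons, ih (List.nodup_cons.1 h).2]
    congr 1
    apply List.filter_eq_self.2
    intro y hy
    have : y ≠ x := fun he => (List.nodup_cons.1 h).1 (he ▸ hy)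
    simp [this]

theorem pvFilterOfMap {α β : Type} (f : α → β) (p : β → Bool) :
    ∀ (l : List α), (l.map f).filter p = (l.filter (fun x => p (f x))).map f := by
  intro l
  induction l with
  | nil => rfl
  | cons c t ih =>
    simp only [List.map_cons, List.filter_cons]
    by_cases hc : p (f c)
    · simp [hc, ih]
    · simp [hc, ih]

theorem pvFilterMapSnd (d : List Int) (lc : List (Nat × List Int)) :
    (lc.filter (fun p => decide (p.2 ≠ d))).map Prod.snd
      = (lc.map Prod.snd).filter (fun y => decide (y ≠ d)) :=
  (pvFilterOfMap Prod.snd (fun y => decide (y ≠ d)) lc).symm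

-- first-occurrence dedup of a list tagged with strictly increasing codes is ordered by
-- each element's minimal code
theorem pvOfKeyAux (key : List Int → Nat) :
    ∀ (n : Nat) (lc : List (Nat × List Int)), lc.length ≤ n →
    (lc.map Prod.fst).Pairwise (· < ·) →
    (∀ p ∈ lc, key p.2 ≤ p.1) →
    (∀ p ∈ lc, ∃ r ∈ lc, r.2 = p.2 ∧ r.1 = key p.2) →
    (PySem.Set.ofList (lc.map Prod.snd)).Pairwise (fun x y => key x < key y) := by
  intro n
  induction n with
  | zero =>
    intro lc hl _ _ _
    have : lc = [] := List.length_eq_zero_iff.1 (Nat.le_zero.1 hl)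
    subst this; simp [PySem.Set.ofList]
  | succ n ihn =>
    intro lc hl h1 h2 h3
    match lc with
    | [] => simp [PySem.Set.ofList]
    | (u, d) :: t =>
      simp only [List.map_cons]
      rw [pvOfListCons]
      rw [List.map_cons] at h1
      have h1t : (t.map Prod.fst).Pairwise (· < ·) := (List.pairwise_cons.1 h1).2
      have h1h : ∀ w ∈ t.map Prod.fst, u < w := (List.pairwise_cons.1 h1).1
      apply List.pairwise_cons.2
      constructor
      · intro y hy
        have hyt : y ∈ (PySem.Set.ofList (t.map Prod.snd)) ∧ y ≠ d := by
          have := List.mem_filter.1 hy; simpa using this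
        have hym : y ∈ t.map Prod.snd := (PySem.Set.mem_ofList _ _).1 hyt.1
        obtain ⟨pe, hpe, hpey⟩ := List.mem_map.1 hym
        obtain ⟨r, hr, hr2, hr1⟩ := h3 pe (List.mem_cons_of_mem _ hpe)
        have hrd : r ≠ (u, d) := by
          intro he
          apply hyt.2; rw [← hpey, ← hr2, he]
        have hrt : r ∈ t := by
          rcases List.mem_cons.1 hr with h | h
          · exact absurd h hrd
          · exact h
        have hur : u < r.1 := h1h r.1 (List.mem_map_of_mem hrt)
        have hkd : key d ≤ u := h2 (u, d) (by simp)
        rw [← hpey]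
        omega
      · have hfil : (PySem.Set.ofList (t.map Prod.snd)).filter (fun y => decide (y ≠ d))
            = PySem.Set.ofList ((t.filter (fun p => decide (p.2 ≠ d))).map Prod.snd) := by
          rw [pvFilterMapSnd, pvOfListFilter]
        rw [hfil]
        set t' := t.filter (fun p => decide (p.2 ≠ d)) with ht'
        have hsub : t'.Sublist t := List.filter_sublist
        apply ihn t'
        · have h1 := hsub.length_le
          have h2 : t.length ≤ n := by simp at hl; omega
          omega
        · exact List.Pairwise.sublist (List.Sublist.map Prod.fst hsub) h1t
        · intro p hp
          exact h2 p (List.mem_cons_of_mem _ (hsub.mem hp))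
        · intro p hp
          have hpd : p.2 ≠ d := by
            have := (List.mem_filter.1 hp).2; simpa using this
          obtain ⟨r, hr, hr2, hr1⟩ := h3 p (List.mem_cons_of_mem _ (hsub.mem hp))
          refine ⟨r, ?_, hr2, hr1⟩
          have hrd : r ≠ (u, d) := by
            intro he; apply hpd; rw [← hr2, he]
          have hrt : r ∈ t := by
            rcases List.mem_cons.1 hr with h | h
            · exact absurd h hrd
            · exact h
          apply List.mem_filter.2
          refine ⟨hrt, by simp [hr2, hpd]⟩

theorem pvOfKey (key : List Int → Nat) (lc : List (Nat × List Int))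
    (h1 : (lc.map Prod.fst).Pairwise (· < ·))
    (h2 : ∀ p ∈ lc, key p.2 ≤ p.1)
    (h3 : ∀ p ∈ lc, ∃ r ∈ lc, r.2 = p.2 ∧ r.1 = key p.2) :
    (PySem.Set.ofList (lc.map Prod.snd)).Pairwise (fun x y => key x < key y) :=
  pvOfKeyAux key lc.length lc le_rfl h1 h2 h3

-- ---------- ghost versions of the two enumerations, tagged with embedding codes ----------

-- the admissibility test A and B both apply before extending a sequence;
-- stated on the position-reversed representation (lowest position first)
abbrev pvCond (q N : Int) (d : List Int) : Prop := (d.length : Int) < q ∧ d.sum ≤ N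

-- A's combs, over the reversed representation, each entry tagged with the bitmask code of
-- the embedding that produced it (position 0 = head of the remaining list = lowest bit)
def combsR (q N : Int) : List Int → List (Nat × List Int)
  | [] => [(0, ([] : List Int))]
  | h :: tl => (combsR q N tl).foldl
      (fun cs p => if pvCond q N p.2 then cs ++ [(2*p.1, p.2), (2*p.1+1, h :: p.2)] else cs) []

-- u is the bitmask code of an embedding of d into a (d's head matched first, at the
-- lowest-numbered chosen position)
def EmbR : List Int → List Int → Nat → Prop
  | [], d, u => d = [] ∧ u = 0
  | h :: tl, d, u =>
      (∃ u', u = 2*u' ∧ EmbR tl d u') ∨ (∃ u' d', u = 2*u'+1 ∧ d = h :: d' ∧ EmbR tl d' u')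

-- greedy leftmost embedding of d into a: its code and the number of consumed positions
def canEmb : List Int → List Int → Option (Nat × Nat)
  | _, [] => some (0, 0)
  | [], _ :: _ => none
  | h :: tl, v :: d =>
      if v = h then (canEmb tl d).map (fun p => (2*p.1+1, p.2+1))
      else (canEmb tl (v :: d)).map (fun p => (2*p.1, p.2+1))

-- every proper suffix of d satisfies pvCond (= A checks every proper prefix of its tuple)
def SufOK (q N : Int) : List Int → Prop
  | [] => True
  | _ :: d => pvCond q N d ∧ SufOK q N d

-- every proper prefix of d satisfies pvCond (= B checks each stage before extending)
def PrefOK (q N : Int) (d : List Int) : Prop := SufOK q N d.reverse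

-- B's entry list after the first j positions of L have been processed:
-- (code, consumed, sequence in reversed representation)
def CEstep (q N : Int) (L : List Int) (j : Nat) (ce : List (Nat × Nat × List Int)) :
    List (Nat × Nat × List Int) :=
  ce ++ ce.flatMap (fun e =>
    if pvCond q N e.2.2 ∧ L.getD j 0 ∉ (L.take j).drop e.2.1
    then [(e.1 + 2^j, (j+1, e.2.2 ++ [L.getD j 0]))] else [])

def CE (q N : Int) (L : List Int) : Nat → List (Nat × Nat × List Int)
  | 0 => [(0, (0, ([] : List Int)))]
  | j+1 => CEstep q N L j (CE q N L j)

-- ---------- loop-shape lemmas for the folds in the two ports ----------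

theorem pvFoldA (q N : Int) (h : Int) : ∀ (l : List (List Int)) (acc : List (List Int)),
    l.foldl (fun cs c => if (c.length : Int) < q ∧ c.sum ≤ N then cs ++ [c, c ++ [h]] else cs) acc
      = acc ++ l.flatMap (fun c => if (c.length : Int) < q ∧ c.sum ≤ N then [c, c ++ [h]] else []) := by
  intro l
  induction l with
  | nil => intro acc; simp
  | cons c t ih =>
    intro acc
    simp only [List.foldl_cons, List.flatMap_cons]
    by_cases hc : (c.length : Int) < q ∧ c.sum ≤ N
    · rw [if_pos hc, if_pos hc, ih]; simp
    · rw [if_neg hc, if_neg hc, ih]; simp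

theorem pvFoldR (q N : Int) (h : Int) : ∀ (l : List (Nat × List Int)) (acc : List (Nat × List Int)),
    l.foldl (fun cs p => if pvCond q N p.2 then cs ++ [(2*p.1, p.2), (2*p.1+1, h :: p.2)] else cs) acc
      = acc ++ l.flatMap (fun p => if pvCond q N p.2 then [(2*p.1, p.2), (2*p.1+1, h :: p.2)] else []) := by
  intro l
  induction l with
  | nil => intro acc; simp
  | cons c t ih =>
    intro acc
    simp only [List.foldl_cons, List.flatMap_cons]
    by_cases hc : pvCond q N c.2
    · rw [if_pos hc, if_pos hc, ih]; simp
    · rw [if_neg hc, if_neg hc, ih]; simp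

theorem pvCombsEq (q N : Int) : ∀ (a : List Int),
    combsA q N a = (combsR q N a).map (fun p => p.2.reverse) := by
  intro a
  induction a with
  | nil => simp [combsA, combsR]
  | cons h tl ih =>
    rw [show combsA q N (h :: tl) = (combsA q N tl).foldl
      (fun cs c => if (c.length : Int) < q ∧ c.sum ≤ N then cs ++ [c, c ++ [h]] else cs) [] from rfl]
    rw [show combsR q N (h :: tl) = (combsR q N tl).foldl
      (fun cs p => if pvCond q N p.2 then cs ++ [(2*p.1, p.2), (2*p.1+1, h :: p.2)] else cs) [] from rfl]
    rw [ih, pvFoldA, pvFoldR]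
    simp only [List.nil_append, List.map_flatMap, List.flatMap_map]
    congr 1
    funext p
    by_cases hc : pvCond q N p.2
    · have hc' : ((p.2.reverse).length : Int) < q ∧ (p.2.reverse).sum ≤ N := by
        simpa [pvCond] using hc
      simp only [Function.comp, if_pos hc, if_pos hc']
      simp [List.reverse_cons]
    · have hc' : ¬(((p.2.reverse).length : Int) < q ∧ (p.2.reverse).sum ≤ N) := by
        simpa [pvCond] using hc
      simp only [Function.comp, if_neg hc, if_neg hc']
      simp

-- ---------- membership and sortedness of combsR ----------

theorem pvMemCombsR (q N : Int) : ∀ (a : List Int) (u : Nat) (d : List Int),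
    ((u, d) ∈ combsR q N a ↔ (EmbR a d u ∧ SufOK q N d ∧ (u % 2 = 1 ∨ pvCond q N d ∨ a = []))) := by
  intro a
  induction a with
  | nil =>
    intro u d
    simp only [combsR, List.mem_singleton, Prod.mk.injEq, EmbR]
    constructor
    · rintro ⟨hu, hd⟩; subst hu; subst hd; exact ⟨⟨rfl, rfl⟩, trivial, by simp⟩
    · rintro ⟨⟨hd, hu⟩, _, _⟩; exact ⟨hu.symm ▸ rfl, hd.symm ▸ rfl⟩
  | cons h tl ih =>
    intro u d
    show (u, d) ∈ (combsR q N tl).foldl _ [] ↔ _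
    rw [pvFoldR]
    simp only [List.nil_append, List.mem_flatMap]
    constructor
    · rintro ⟨p, hp, hmem⟩
      by_cases hc : pvCond q N p.2
      · rw [if_pos hc] at hmem
        obtain ⟨hE, hS, _⟩ := (ih p.1 p.2).1 (by simpa using hp)
        simp only [List.mem_cons, List.mem_singleton, List.not_mem_nil, or_false,
          Prod.mk.injEq] at hmem
        rcases hmem with ⟨hu, hd⟩ | ⟨hu, hd⟩
        · subst hu; subst hd
          refine ⟨Or.inl ⟨p.1, rfl, hE⟩, hS, Or.inr (Or.inl hc)⟩
        · subst hu; subst hd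
          exact ⟨Or.inr ⟨p.1, p.2, rfl, rfl, hE⟩, ⟨hc, hS⟩, Or.inl (by omega)⟩
      · rw [if_neg hc] at hmem; simp at hmem
    · rintro ⟨hE, hS, hthird⟩
      have hne : (h :: tl) ≠ [] := by simp
      rcases hE with ⟨u', hu, hE'⟩ | ⟨u', d', hu, hd, hE'⟩
      · -- even code: d is carried over unchanged, so pvCond q N d was checked here
        have hcd : pvCond q N d := by
          rcases hthird with hodd | hcd | habs
          · exfalso; omega
          · exact hcd
          · exact absurd habs hne
        refine ⟨(u', d), (ih u' d).2 ⟨hE', hS, Or.inr (Or.inl hcd)⟩, ?_⟩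
        rw [if_pos hcd]
        subst hu; simp
      · -- odd code: d = h :: d', and pvCond q N d' was checked when extending
        subst hd
        obtain ⟨hcd', hS'⟩ := hS
        refine ⟨(u', d'), (ih u' d').2 ⟨hE', hS', Or.inr (Or.inl hcd')⟩, ?_⟩
        rw [if_pos hcd']
        subst hu; simp

theorem pvMemFlatMapFst (q N : Int) (h : Int) (lc : List (Nat × List Int)) :
    ∀ y ∈ (lc.flatMap (fun p => if pvCond q N p.2 then [(2*p.1, p.2), (2*p.1+1, h :: p.2)] else [])).map Prod.fst,
      ∃ p ∈ lc, y = 2*p.1 ∨ y = 2*p.1+1 := by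
  intro y hy
  obtain ⟨e, he, hey⟩ := List.mem_map.1 hy
  obtain ⟨p, hp, hmem⟩ := List.mem_flatMap.1 he
  refine ⟨p, hp, ?_⟩
  by_cases hc : pvCond q N p.2
  · rw [if_pos hc] at hmem
    simp only [List.mem_cons, List.mem_singleton, List.not_mem_nil, or_false] at hmem
    rcases hmem with h1 | h1 <;> [exact Or.inl (by rw [← hey, h1]); exact Or.inr (by rw [← hey, h1])]
  · rw [if_neg hc] at hmem; simp at hmem

theorem pvSortedCombsR (q N : Int) : ∀ (a : List Int),
    ((combsR q N a).map Prod.fst).Pairwise (· < ·) := by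
  intro a
  induction a with
  | nil => simp [combsR]
  | cons h tl ih =>
    show (((combsR q N tl).foldl _ []).map Prod.fst).Pairwise (· < ·)
    rw [pvFoldR]
    simp only [List.nil_append]
    suffices haux : ∀ lc : List (Nat × List Int), (lc.map Prod.fst).Pairwise (· < ·) →
        ((lc.flatMap (fun p => if pvCond q N p.2 then [(2*p.1, p.2), (2*p.1+1, h :: p.2)] else [])).map Prod.fst).Pairwise (· < ·) from
      haux _ ih
    intro lc
    induction lc with
    | nil => intro _; simp
    | cons p t iht =>
      intro hall
      rw [List.map_cons] at hall
      have hhead := (List.pairwise_cons.1 hall).1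
      have htail : (t.map Prod.fst).Pairwise (· < ·) := (List.pairwise_cons.1 hall).2
      simp only [List.flatMap_cons, List.map_append]
      apply (List.pairwise_append).2
      refine ⟨?_, iht htail, ?_⟩
      · by_cases hc : pvCond q N p.2
        · rw [if_pos hc]; simp
        · rw [if_neg hc]; simp
      · intro x hx y hy
        obtain ⟨r, hr, hror⟩ := pvMemFlatMapFst q N h t y hy
        have hpr : p.1 < r.1 := hhead r.1 (List.mem_map_of_mem hr)
        have hxle : x ≤ 2*p.1 + 1 := by
          by_cases hc : pvCond q N p.2
          · rw [if_pos hc] at hx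
            simp at hx
            rcases hx with h1 | h1 <;> omega
          · rw [if_neg hc] at hx; simp at hx
        omega

-- ---------- basic facts about embedding codes ----------

theorem pvEmbNil : ∀ (a : List Int) (u : Nat), EmbR a [] u ↔ u = 0 := by
  intro a
  induction a with
  | nil => intro u; simp [EmbR]
  | cons h tl ih =>
    intro u
    simp only [EmbR]
    constructor
    · rintro (⟨u', hu, hE⟩ | ⟨u', d', _, hd, _⟩)
      · rw [hu, (ih u').1 hE]
      · exact absurd hd (by simp)
    · intro hu; exact Or.inl ⟨0, by omega, (ih 0).2 rfl⟩

theorem pvEmbDrop : ∀ (a : List Int) (v : Int) (d : List Int) (u : Nat),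
    EmbR a (v :: d) u → ∃ u', u' < u ∧ EmbR a d u' := by
  intro a
  induction a with
  | nil => intro v d u h; exact absurd h.1 (by simp)
  | cons h tl ih =>
    rintro v d u (⟨u', hu, hE⟩ | ⟨u', d', hu, hd, hE⟩)
    · obtain ⟨u₁, hlt, hE₁⟩ := ih v d u' hE
      exact ⟨2*u₁, by omega, Or.inl ⟨u₁, rfl, hE₁⟩⟩
    · refine ⟨2*u', by omega, Or.inl ⟨u', rfl, ?_⟩⟩
      injection hd with h1 h2
      rw [h2]; exact hE

theorem pvCanSound : ∀ (a : List Int) (d : List Int) (u n : Nat),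
    canEmb a d = some (u, n) → EmbR a d u := by
  intro a
  induction a with
  | nil =>
    intro d u n h
    cases d with
    | nil =>
      have h' : u = 0 ∧ n = 0 := by simpa [canEmb] using h.symm
      exact ⟨rfl, h'.1⟩
    | cons v d => simp [canEmb] at h
  | cons hh tl ih =>
    intro d u n h
    cases d with
    | nil =>
      have h' : u = 0 ∧ n = 0 := by simpa [canEmb] using h.symm
      exact (pvEmbNil _ u).2 h'.1
    | cons v d =>
      by_cases hv : v = hh
      · rw [show canEmb (hh :: tl) (v :: d) = (canEmb tl d).map (fun p => (2*p.1+1, p.2+1)) by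
          simp [canEmb, hv]] at h
        obtain ⟨⟨w, m⟩, hw, hmap⟩ := Option.map_eq_some_iff.1 h
        injection hmap with h1 h2
        exact Or.inr ⟨w, d, h1.symm, by rw [hv], ih d w m hw⟩
      · rw [show canEmb (hh :: tl) (v :: d) = (canEmb tl (v :: d)).map (fun p => (2*p.1, p.2+1)) by
          simp [canEmb, hv]] at h
        obtain ⟨⟨w, m⟩, hw, hmap⟩ := Option.map_eq_some_iff.1 h
        injection hmap with h1 h2
        exact Or.inl ⟨w, h1.symm, ih _ w m hw⟩

theorem pvCanMin : ∀ (a : List Int) (d : List Int) (u : Nat),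
    EmbR a d u → ∃ p : Nat × Nat, canEmb a d = some p ∧ p.1 ≤ u := by
  intro a
  induction a with
  | nil =>
    rintro d u ⟨hd, hu⟩
    subst hd; exact ⟨(0, 0), rfl, by omega⟩
  | cons h tl ih =>
    rintro d u (⟨u', hu, hE⟩ | ⟨u', d', hu, hd, hE⟩)
    · cases d with
      | nil => exact ⟨(0, 0), rfl, by omega⟩
      | cons v d₂ =>
        by_cases hv : v = h
        · obtain ⟨u₂, hlt, hE₂⟩ := pvEmbDrop tl v d₂ u' hE
          obtain ⟨⟨w, m⟩, hw, hle⟩ := ih d₂ u₂ hE₂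
          refine ⟨(2*w+1, m+1), ?_, by simp; omega⟩
          simp [canEmb, hv, hw]
        · obtain ⟨⟨w, m⟩, hw, hle⟩ := ih (v :: d₂) u' hE
          refine ⟨(2*w, m+1), ?_, by simp; omega⟩
          simp [canEmb, hv, hw]
    · subst hd
      obtain ⟨⟨w, m⟩, hw, hle⟩ := ih d' u' hE
      refine ⟨(2*w+1, m+1), ?_, by simp; omega⟩
      simp [canEmb, hw]

theorem pvEmbSub : ∀ (a d : List Int), (∃ u, EmbR a d u) ↔ d.Sublist a := by
  intro a
  induction a with
  | nil =>
    intro d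
    constructor
    · rintro ⟨u, hd, _⟩; rw [hd]
    · intro h; rw [List.sublist_nil.1 h]; exact ⟨0, rfl, rfl⟩
  | cons h tl ih =>
    intro d
    constructor
    · rintro ⟨u, (⟨u', _, hE⟩ | ⟨u', d', _, hd, hE⟩)⟩
      · exact ((ih d).1 ⟨u', hE⟩).cons h
      · rw [hd]; exact ((ih d').1 ⟨u', hE⟩).cons₂ h
    · intro hsub
      cases hsub with
      | cons _ hs => obtain ⟨u, hE⟩ := (ih d).2 hs; exact ⟨2*u, Or.inl ⟨u, rfl, hE⟩⟩
      | cons₂ _ hs =>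
        obtain ⟨u, hE⟩ := (ih _).2 hs
        exact ⟨2*u+1, Or.inr ⟨u, _, rfl, rfl, hE⟩⟩

-- an odd embedding code into h :: tl forces d to start with h
theorem pvEmbOddHead (h : Int) (tl d : List Int) (u : Nat)
    (hE : EmbR (h :: tl) d u) (hodd : u % 2 = 1) : ∃ d', d = h :: d' := by
  rcases hE with ⟨u', hu, _⟩ | ⟨u', d', _, hd, _⟩
  · omega
  · exact ⟨d', hd⟩

-- ---------- canEmb: consumed-count bounds and append behaviour ----------

theorem pvCanBounds : ∀ (a d : List Int) (u n : Nat), canEmb a d = some (u, n) →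
    n ≤ a.length ∧ u < 2^n ∧ (d = [] → u = 0 ∧ n = 0) ∧ (d ≠ [] → 2^(n-1) ≤ u ∧ 1 ≤ n) := by
  intro a
  induction a with
  | nil =>
    intro d u n h
    cases d with
    | nil =>
      have h' : u = 0 ∧ n = 0 := by simpa [canEmb] using h.symm
      obtain ⟨hu, hn⟩ := h'
      subst hu; subst hn
      exact ⟨by omega, by norm_num, fun _ => ⟨rfl, rfl⟩, fun hne => absurd rfl hne⟩
    | cons v d => simp [canEmb] at h
  | cons hh tl ih =>
    intro d u n h
    cases d with
    | nil =>
      have h' : u = 0 ∧ n = 0 := by simpa [canEmb] using h.symm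
      obtain ⟨hu, hn⟩ := h'
      subst hu; subst hn
      exact ⟨by omega, by norm_num, fun _ => ⟨rfl, rfl⟩, fun hne => absurd rfl hne⟩
    | cons v d₂ =>
      by_cases hv : v = hh
      · rw [show canEmb (hh :: tl) (v :: d₂) = (canEmb tl d₂).map (fun p => (2*p.1+1, p.2+1)) by
          simp [canEmb, hv]] at h
        obtain ⟨⟨w, m⟩, hw, hmap⟩ := Option.map_eq_some_iff.1 h
        injection hmap with h1 h2
        obtain ⟨hm, hwb, hnil, hcons⟩ := ih d₂ w m hw
        subst h1; subst h2
        refine ⟨by simpa using hm, ?_, by simp, fun _ => ⟨?_, by omega⟩⟩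
        · have : 2*w+1 < 2*2^m := by omega
          simpa [pow_succ] using by omega
        · simp only [Nat.add_sub_cancel]
          by_cases hd₂ : d₂ = []
          · subst hd₂
            obtain ⟨hw0, hm0⟩ := hnil rfl
            subst hw0; subst hm0; simp
          · obtain ⟨hge, hm1⟩ := hcons hd₂
            calc 2^m = 2*2^(m-1) := by rw [← pow_succ']; congr 1; omega
            _ ≤ 2*w := by omega
            _ ≤ 2*w+1 := by omega
      · rw [show canEmb (hh :: tl) (v :: d₂) = (canEmb tl (v :: d₂)).map (fun p => (2*p.1, p.2+1)) by
          simp [canEmb, hv]] at h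
        obtain ⟨⟨w, m⟩, hw, hmap⟩ := Option.map_eq_some_iff.1 h
        injection hmap with h1 h2
        obtain ⟨hm, hwb, hnil, hcons⟩ := ih (v :: d₂) w m hw
        obtain ⟨hge, hm1⟩ := hcons (by simp)
        subst h1; subst h2
        refine ⟨by simpa using hm, ?_, by simp, fun _ => ⟨?_, by omega⟩⟩
        · calc 2*w < 2*2^m := by omega
          _ = 2^(m+1) := by rw [pow_succ]; ring
        · simp only [Nat.add_sub_cancel]
          calc 2^m = 2*2^(m-1) := by rw [← pow_succ']; congr 1; omega
          _ ≤ 2*w := by omega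

theorem pvCanAppend : ∀ (a b d : List Int) (u n : Nat),
    canEmb a d = some (u, n) → canEmb (a ++ b) d = some (u, n) := by
  intro a
  induction a with
  | nil =>
    intro b d u n h
    cases d with
    | nil =>
      have h' : u = 0 ∧ n = 0 := by simpa [canEmb] using h.symm
      simp [canEmb, h'.1, h'.2]
    | cons v d => simp [canEmb] at h
  | cons hh tl ih =>
    intro b d u n h
    cases d with
    | nil =>
      have h' : u = 0 ∧ n = 0 := by simpa [canEmb] using h.symm
      simp [canEmb, h'.1, h'.2]
    | cons v d₂ =>
      by_cases hv : v = hh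
      · rw [show canEmb (hh :: tl) (v :: d₂) = (canEmb tl d₂).map (fun p => (2*p.1+1, p.2+1)) by
          simp [canEmb, hv]] at h
        obtain ⟨⟨w, m⟩, hw, hmap⟩ := Option.map_eq_some_iff.1 h
        have := ih b d₂ w m hw
        show canEmb (hh :: (tl ++ b)) (v :: d₂) = some (u, n)
        rw [show canEmb (hh :: (tl ++ b)) (v :: d₂) = (canEmb (tl ++ b) d₂).map (fun p => (2*p.1+1, p.2+1)) by
          simp [canEmb, hv], this]
        simpa using hmap
      · rw [show canEmb (hh :: tl) (v :: d₂) = (canEmb tl (v :: d₂)).map (fun p => (2*p.1, p.2+1)) by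
          simp [canEmb, hv]] at h
        obtain ⟨⟨w, m⟩, hw, hmap⟩ := Option.map_eq_some_iff.1 h
        have := ih b (v :: d₂) w m hw
        show canEmb (hh :: (tl ++ b)) (v :: d₂) = some (u, n)
        rw [show canEmb (hh :: (tl ++ b)) (v :: d₂) = (canEmb (tl ++ b) (v :: d₂)).map (fun p => (2*p.1, p.2+1)) by
          simp [canEmb, hv], this]
        simpa using hmap

theorem pvCanTake : ∀ (a b d : List Int) (u n : Nat),
    canEmb (a ++ b) d = some (u, n) → n ≤ a.length → canEmb a d = some (u, n) := by
  intro a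
  induction a with
  | nil =>
    intro b d u n h hn
    have h0 : n = 0 := by simpa using hn
    subst h0
    cases d with
    | nil =>
      have h' : (0, 0) = ((u : Nat), (0 : Nat)) := by simpa [canEmb] using h
      injection h' with h1 h2
      simp [canEmb, ← h1]
    | cons v d₂ =>
      exfalso
      obtain ⟨_, _, _, hcons⟩ := pvCanBounds _ _ _ _ h
      have := (hcons (by simp)).2; omega
  | cons hh tl ih =>
    intro b d u n h hn
    cases d with
    | nil =>
      have h' : u = 0 ∧ n = 0 := by simpa [canEmb] using h.symm
      simp [canEmb, h'.1, h'.2]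
    | cons v d₂ =>
      by_cases hv : v = hh
      · rw [show canEmb ((hh :: tl) ++ b) (v :: d₂) = (canEmb (tl ++ b) d₂).map (fun p => (2*p.1+1, p.2+1)) by
          simp [canEmb, hv]] at h
        obtain ⟨⟨w, m⟩, hw, hmap⟩ := Option.map_eq_some_iff.1 h
        injection hmap with h1 h2
        have := ih b d₂ w m hw (by simp at hn; omega)
        rw [show canEmb (hh :: tl) (v :: d₂) = (canEmb tl d₂).map (fun p => (2*p.1+1, p.2+1)) by
          simp [canEmb, hv], this]
        simp [h1, h2]
      · rw [show canEmb ((hh :: tl) ++ b) (v :: d₂) = (canEmb (tl ++ b) (v :: d₂)).map (fun p => (2*p.1, p.2+1)) by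
          simp [canEmb, hv]] at h
        obtain ⟨⟨w, m⟩, hw, hmap⟩ := Option.map_eq_some_iff.1 h
        injection hmap with h1 h2
        have := ih b (v :: d₂) w m hw (by simp at hn; omega)
        rw [show canEmb (hh :: tl) (v :: d₂) = (canEmb tl (v :: d₂)).map (fun p => (2*p.1, p.2+1)) by
          simp [canEmb, hv], this]
        simp [h1, h2]

-- ---------- canEmb: extending both the position list and the sequence by one ----------

theorem pvCanExt1 : ∀ (P : List Int) (d : List Int) (v : Int) (u n : Nat),
    canEmb P d = some (u, n) → v ∉ P.drop n →
    canEmb (P ++ [v]) (d ++ [v]) = some (u + 2^P.length, P.length + 1) := by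
  intro P
  induction P with
  | nil =>
    intro d v u n h _
    cases d with
    | nil =>
      have h' : (0, 0) = ((u : Nat), (n : Nat)) := by simpa [canEmb] using h
      injection h' with h1 h2
      simp [canEmb, ← h1]
    | cons w d₂ => simp [canEmb] at h
  | cons hh tl ih =>
    intro d v u n h hnin
    cases d with
    | nil =>
      have h' : (0, 0) = ((u : Nat), (n : Nat)) := by simpa [canEmb] using h
      injection h' with h1 h2
      have hvh : v ≠ hh := by
        intro he; apply hnin; rw [← h2]; simp [he]
      have hvtl : v ∉ tl := by
        intro he; apply hnin; rw [← h2]; simp [he]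
      show canEmb (hh :: (tl ++ [v])) [v] = _
      rw [show canEmb (hh :: (tl ++ [v])) [v]
          = (canEmb (tl ++ [v]) [v]).map (fun p => (2*p.1, p.2+1)) from by simp [canEmb, hvh]]
      have hstep := ih [] v 0 0 (by simp [canEmb]) (by simpa using hvtl)
      simp only [List.nil_append] at hstep
      rw [hstep]
      simp only [Option.map_some, Option.some.injEq, Prod.mk.injEq, List.length_cons, pow_succ]
      constructor <;> first | trivial | omega
    | cons w d₂ =>
      by_cases hw : w = hh
      · rw [show canEmb (hh :: tl) (w :: d₂)
            = (canEmb tl d₂).map (fun p => (2*p.1+1, p.2+1)) from by simp [canEmb, hw]] at h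
        obtain ⟨⟨u₂, n₂⟩, hu₂, hmap⟩ := Option.map_eq_some_iff.1 h
        injection hmap with h1 h2
        have hnin' : v ∉ tl.drop n₂ := by
          intro he; apply hnin; rw [← h2]; simpa using he
        have hstep := ih d₂ v u₂ n₂ hu₂ hnin'
        show canEmb (hh :: (tl ++ [v])) (w :: (d₂ ++ [v])) = _
        rw [show canEmb (hh :: (tl ++ [v])) (w :: (d₂ ++ [v]))
            = (canEmb (tl ++ [v]) (d₂ ++ [v])).map (fun p => (2*p.1+1, p.2+1)) from by
          simp [canEmb, hw], hstep]
        simp only [Option.map_some, Option.some.injEq, Prod.mk.injEq, List.length_cons, pow_succ]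
        constructor <;> first | trivial | omega
      · rw [show canEmb (hh :: tl) (w :: d₂)
            = (canEmb tl (w :: d₂)).map (fun p => (2*p.1, p.2+1)) from by simp [canEmb, hw]] at h
        obtain ⟨⟨u₂, n₂⟩, hu₂, hmap⟩ := Option.map_eq_some_iff.1 h
        injection hmap with h1 h2
        have hnin' : v ∉ tl.drop n₂ := by
          intro he; apply hnin; rw [← h2]; simpa using he
        have hstep := ih (w :: d₂) v u₂ n₂ hu₂ hnin'
        show canEmb (hh :: (tl ++ [v])) (w :: (d₂ ++ [v])) = _
        rw [show canEmb (hh :: (tl ++ [v])) (w :: (d₂ ++ [v]))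
            = (canEmb (tl ++ [v]) ((w :: d₂) ++ [v])).map (fun p => (2*p.1, p.2+1)) from by
          simp [canEmb, hw], hstep]
        simp only [Option.map_some, Option.some.injEq, Prod.mk.injEq, List.length_cons, pow_succ]
        constructor <;> first | trivial | omega

theorem pvCanExt2 : ∀ (P : List Int) (e : List Int) (v : Int) (w : Nat),
    canEmb (P ++ [v]) e = some (w, P.length + 1) →
    ∃ d u n, e = d ++ [v] ∧ canEmb P d = some (u, n) ∧ v ∉ P.drop n ∧ w = u + 2^P.length := by
  intro P
  induction P with
  | nil =>
    intro e v w h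
    cases e with
    | nil => simp [canEmb] at h
    | cons x e' =>
      by_cases hx : x = v
      · cases e' with
        | nil =>
          have hw : w = 1 := by
            rw [show ((([] : List Int) ++ [v])) = [v] from rfl] at h
            rw [show canEmb [v] [x] = some (1, 1) from by simp [canEmb, hx]] at h
            injection h with h'
            injection h' with h1 h2
            omega
          exact ⟨[], 0, 0, by simp [hx], by simp [canEmb], by simp, by simp [hw]⟩
        | cons y e'' =>
          exfalso
          rw [show ((([] : List Int) ++ [v])) = [v] from rfl] at h
          rw [show canEmb [v] (x :: y :: e'')
              = (canEmb ([] : List Int) (y :: e'')).map (fun p => (2*p.1+1, p.2+1)) from by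
            simp [canEmb, hx]] at h
          simp [canEmb] at h
      · exfalso
        rw [show ((([] : List Int) ++ [v])) = [v] from rfl] at h
        rw [show canEmb [v] (x :: e')
            = (canEmb ([] : List Int) (x :: e')).map (fun p => (2*p.1, p.2+1)) from by
          simp [canEmb, hx]] at h
        simp [canEmb] at h
  | cons hh tl ih =>
    intro e v w h
    cases e with
    | nil =>
      exfalso
      rw [show canEmb ((hh :: tl) ++ [v]) ([] : List Int) = some (0, 0) from by simp [canEmb]] at h
      injection h with h'
      injection h' with h1 h2
      simp at h2
    | cons x e' =>
      by_cases hx : x = hh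
      · rw [show canEmb ((hh :: tl) ++ [v]) (x :: e')
            = (canEmb (tl ++ [v]) e').map (fun p => (2*p.1+1, p.2+1)) from by
          simp [canEmb, hx]] at h
        obtain ⟨⟨w₂, m₂⟩, hw₂, hmap⟩ := Option.map_eq_some_iff.1 h
        injection hmap with h1 h2
        have hm₂ : m₂ = tl.length + 1 := by simp at h2; omega
        subst hm₂
        obtain ⟨d₂, u₂, n₂, he', hcan, hnin, hw2⟩ := ih e' v w₂ hw₂
        refine ⟨hh :: d₂, 2*u₂+1, n₂+1, by simp [he', hx], ?_, by simpa using hnin, ?_⟩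
        · rw [show canEmb (hh :: tl) (hh :: d₂)
              = (canEmb tl d₂).map (fun p => (2*p.1+1, p.2+1)) from by simp [canEmb], hcan]
          rfl
        · subst hw2
          simp only [List.length_cons, pow_succ] at *
          omega
      · rw [show canEmb ((hh :: tl) ++ [v]) (x :: e')
            = (canEmb (tl ++ [v]) (x :: e')).map (fun p => (2*p.1, p.2+1)) from by
          simp [canEmb, hx]] at h
        obtain ⟨⟨w₂, m₂⟩, hw₂, hmap⟩ := Option.map_eq_some_iff.1 h
        injection hmap with h1 h2
        have hm₂ : m₂ = tl.length + 1 := by simp at h2; omega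
        subst hm₂
        obtain ⟨d₂, u₂, n₂, he', hcan, hnin, hw2⟩ := ih (x :: e') v w₂ hw₂
        cases d₂ with
        | nil =>
          have hxv : x = v ∧ e' = [] := by simpa using he'
          have hb := pvCanBounds tl [] u₂ n₂ hcan
          obtain ⟨hu0, hn0⟩ := hb.2.2.1 rfl
          subst hu0; subst hn0
          refine ⟨[], 0, 0, by simp [hxv.1, hxv.2], by simp [canEmb], ?_, ?_⟩
          · simp only [List.drop_zero]
            intro hv
            rcases List.mem_cons.1 hv with h' | h'
            · exact hx (by rw [hxv.1, h'])
            · exact (by simpa using hnin : v ∉ tl) h'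
          · subst hw2
            simp only [List.length_cons, pow_succ] at *
            omega
        | cons y d₃ =>
          have hyx : y = x ∧ d₃ ++ [v] = e' := by
            have h0 := he'
            simp only [List.cons_append, List.cons.injEq] at h0
            exact ⟨h0.1.symm, h0.2.symm⟩
          rw [hyx.1] at hcan
          refine ⟨x :: d₃, 2*u₂, n₂+1, by simp [hyx.2], ?_, by simpa using hnin, ?_⟩
          · rw [show canEmb (hh :: tl) (x :: d₃)
                = (canEmb tl (x :: d₃)).map (fun p => (2*p.1, p.2+1)) from by simp [canEmb, hx], hcan]
            rfl
          · subst hw2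
            simp only [List.length_cons, pow_succ] at *
            omega

-- ---------- SufOK / PrefOK ----------

theorem pvCondRev (q N : Int) (d : List Int) : pvCond q N d.reverse ↔ pvCond q N d := by
  simp [pvCond]

theorem pvSufOf (q N : Int) : ∀ (d : List Int),
    (∀ s, s.Sublist d → s.length < d.length → pvCond q N s) → SufOK q N d := by
  intro d
  induction d with
  | nil => intro _; trivial
  | cons v t ih =>
    intro h
    refine ⟨h t (List.sublist_cons_self v t) (by simp), ?_⟩
    apply ih
    intro s hs hl
    exact h s (hs.trans (List.sublist_cons_self v t)) (by simp; omega)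

theorem pvPrefAppend (q N : Int) (d : List Int) (v : Int) :
    PrefOK q N (d ++ [v]) ↔ pvCond q N d ∧ PrefOK q N d := by
  show SufOK q N (d ++ [v]).reverse ↔ _
  rw [List.reverse_append]
  show SufOK q N (v :: d.reverse) ↔ _
  show pvCond q N d.reverse ∧ SufOK q N d.reverse ↔ _
  rw [pvCondRev]
  rfl

theorem pvPrefOf (q N : Int) (d : List Int)
    (h : ∀ s, s.Sublist d → s.length < d.length → pvCond q N s) : PrefOK q N d := by
  apply pvSufOf
  intro s hs hl
  rw [← pvCondRev]
  apply h
  · have := hs.reverse; simpa using this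
  · simpa using hl

-- ---------- sequences over X of bounded length embed into X repeated ----------

theorem pvSubl (X : List Int) : ∀ (t : Nat) (d : List Int),
    (∀ v ∈ d, v ∈ X) → d.length ≤ t → d.Sublist (List.replicate t X).flatten := by
  intro t
  induction t with
  | zero =>
    intro d _ hl
    have : d = [] := List.length_eq_zero_iff.1 (by omega)
    simp [this]
  | succ t ih =>
    intro d hv hl
    cases d with
    | nil => simp
    | cons v d' =>
      obtain ⟨s₁, s₂, hX⟩ := List.append_of_mem (hv v (by simp))
      have hd' : d'.Sublist (List.replicate t X).flatten :=
        ih d' (fun w hw => hv w (List.mem_cons_of_mem _ hw)) (by simp at hl; omega)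
      have h1 : (v :: d').Sublist (v :: (s₂ ++ (List.replicate t X).flatten)) :=
        (hd'.trans (List.sublist_append_right s₂ _)).cons₂ v
      have h2 : (v :: (s₂ ++ (List.replicate t X).flatten)).Sublist (s₁ ++ (v :: (s₂ ++ (List.replicate t X).flatten))) :=
        List.sublist_append_right s₁ _
      have : (List.replicate (t+1) X).flatten = s₁ ++ (v :: (s₂ ++ (List.replicate t X).flatten)) := by
        rw [List.replicate_succ, List.flatten_cons, hX]; simp
      rw [this]
      exact h1.trans h2

theorem pvMemFlatten (X : List Int) (t : Nat) : ∀ v ∈ (List.replicate t X).flatten, v ∈ X := by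
  intro v hv
  obtain ⟨l, hl, hvl⟩ := List.mem_flatten.1 hv
  rw [List.eq_of_mem_replicate hl] at hvl
  exact hvl

theorem pvFlattenLen (X : List Int) (t : Nat) : (List.replicate t X).flatten.length = t * X.length := by
  induction t with
  | zero => simp
  | succ t ih => rw [List.replicate_succ, List.flatten_cons]; simp [ih]; ring

-- ---------- characterisation and sortedness of CE ----------

theorem pvMemCE (q N : Int) (L : List Int) : ∀ (j : Nat), j ≤ L.length →
    ∀ (u n : Nat) (d : List Int),
      ((u, (n, d)) ∈ CE q N L j ↔ (canEmb (L.take j) d = some (u, n) ∧ PrefOK q N d)) := by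
  intro j
  induction j with
  | zero =>
    intro _ u n d
    constructor
    · intro hmem
      have h1 : (u, (n, d)) = (0, (0, ([] : List Int))) := by simpa [CE] using hmem
      injection h1 with hu h2
      injection h2 with hn hd
      subst hu; subst hn; subst hd
      refine ⟨by simp [canEmb], ?_⟩
      show SufOK q N ([] : List Int).reverse
      simp only [List.reverse_nil]
      trivial
    · rintro ⟨hcan, _⟩
      cases d with
      | nil =>
        have h1 : (0, 0) = ((u : Nat), (n : Nat)) := by simpa [canEmb] using hcan
        injection h1 with hu hn
        simp [CE, ← hu, ← hn]
      | cons v d' => simp [canEmb] at hcan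
  | succ j ih =>
    intro hj u n d
    have hjL : j < L.length := by omega
    have htake : L.take (j+1) = L.take j ++ [L.getD j 0] := by
      rw [List.take_succ]
      congr 1
      rw [List.getElem?_eq_getElem hjL]
      simp [List.getD, List.getElem?_eq_getElem hjL]
    have hlenTake : (L.take j).length = j := List.length_take_of_le (by omega)
    constructor
    · intro hmem
      rcases List.mem_append.1 hmem with hold | hnew
      · obtain ⟨hcan, hpre⟩ := (ih (by omega) u n d).1 hold
        refine ⟨?_, hpre⟩
        rw [htake]
        exact pvCanAppend _ _ _ _ _ hcan
      · obtain ⟨⟨u₂, n₂, d₂⟩, he, hsel⟩ := List.mem_flatMap.1 hnew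
        by_cases hc : pvCond q N d₂ ∧ L.getD j 0 ∉ (L.take j).drop n₂
        · rw [if_pos hc] at hsel
          simp only [List.mem_singleton, Prod.mk.injEq] at hsel
          obtain ⟨hu, hn, hd⟩ := hsel
          obtain ⟨hcan₂, hpre₂⟩ := (ih (by omega) u₂ n₂ d₂).1 he
          subst hu; subst hn; subst hd
          constructor
          · rw [htake]
            have := pvCanExt1 (L.take j) d₂ (L.getD j 0) u₂ n₂ hcan₂ hc.2
            rw [hlenTake] at this
            exact this
          · exact (pvPrefAppend q N d₂ _).2 ⟨hc.1, hpre₂⟩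
        · rw [if_neg hc] at hsel; simp at hsel
    · rintro ⟨hcan, hpre⟩
      rw [htake] at hcan
      obtain ⟨hnb, _, _, _⟩ := pvCanBounds _ _ _ _ hcan
      rw [List.length_append, hlenTake] at hnb
      by_cases hn : n ≤ j
      · apply List.mem_append_left
        exact (ih (by omega) u n d).2 ⟨pvCanTake _ _ _ _ _ hcan (by omega), hpre⟩
      · have hn1 : n = j + 1 := by simp at hnb; omega
        subst hn1
        apply List.mem_append_right
        have hcan' : canEmb (L.take j ++ [L.getD j 0]) d = some (u, (L.take j).length + 1) := by
          rw [hlenTake]; exact hcan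
        obtain ⟨d₂, u₂, n₂, hd, hcan₂, hnin, hw⟩ := pvCanExt2 _ _ _ _ hcan'
        subst hd
        obtain ⟨hcond₂, hpre₂⟩ := (pvPrefAppend q N d₂ _).1 hpre
        apply List.mem_flatMap.2
        refine ⟨(u₂, (n₂, d₂)), (ih (by omega) u₂ n₂ d₂).2 ⟨hcan₂, hpre₂⟩, ?_⟩
        rw [if_pos ⟨hcond₂, hnin⟩]
        have hu : u = u₂ + 2^j := by rw [hw, hlenTake]
        simp [hu]

theorem pvNewMemCE (q N : Int) (L : List Int) (j : Nat) :
    ∀ (ce : List (Nat × Nat × List Int)) (y : Nat × Nat × List Int),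
      y ∈ ce.flatMap (fun e =>
        if pvCond q N e.2.2 ∧ L.getD j 0 ∉ (L.take j).drop e.2.1
        then [(e.1 + 2^j, (j+1, e.2.2 ++ [L.getD j 0]))] else []) →
      ∃ e ∈ ce, y.1 = e.1 + 2^j := by
  intro ce y hy
  obtain ⟨e, he, hsel⟩ := List.mem_flatMap.1 hy
  by_cases hc : pvCond q N e.2.2 ∧ L.getD j 0 ∉ (L.take j).drop e.2.1
  · rw [if_pos hc] at hsel
    simp only [List.mem_singleton] at hsel
    exact ⟨e, he, by rw [hsel]⟩
  · rw [if_neg hc] at hsel; simp at hsel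

theorem pvSortedCE (q N : Int) (L : List Int) : ∀ (j : Nat),
    ((CE q N L j).map Prod.fst).Pairwise (· < ·) ∧ (∀ e ∈ CE q N L j, e.1 < 2^j) := by
  intro j
  induction j with
  | zero =>
    constructor
    · simp [CE]
    · intro e he; simp [CE] at he; simp [he]
  | succ j ih =>
    obtain ⟨hso, hbd⟩ := ih
    have hauxs : ∀ (ce : List (Nat × Nat × List Int)), ((ce.map Prod.fst).Pairwise (· < ·)) →
        ((ce.flatMap (fun e =>
          if pvCond q N e.2.2 ∧ L.getD j 0 ∉ (L.take j).drop e.2.1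
          then [(e.1 + 2^j, (j+1, e.2.2 ++ [L.getD j 0]))] else [])).map Prod.fst).Pairwise (· < ·) := by
      intro ce
      induction ce with
      | nil => intro _; simp
      | cons e t iht =>
        intro hall
        rw [List.map_cons] at hall
        have hhead := (List.pairwise_cons.1 hall).1
        have htail := (List.pairwise_cons.1 hall).2
        simp only [List.flatMap_cons, List.map_append]
        apply List.pairwise_append.2
        refine ⟨?_, iht htail, ?_⟩
        · by_cases hc : pvCond q N e.2.2 ∧ L.getD j 0 ∉ (L.take j).drop e.2.1
          · rw [if_pos hc]; simp
          · rw [if_neg hc]; simp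
        · intro x hx y hy
          obtain ⟨y', hy', hyy⟩ := List.mem_map.1 hy
          obtain ⟨r, hr, hry⟩ := pvNewMemCE q N L j t y' hy'
          have hxe : x = e.1 + 2^j := by
            by_cases hc : pvCond q N e.2.2 ∧ L.getD j 0 ∉ (L.take j).drop e.2.1
            · rw [if_pos hc] at hx; simpa using hx
            · rw [if_neg hc] at hx; simp at hx
          have her : e.1 < r.1 := hhead r.1 (List.mem_map_of_mem hr)
          rw [hxe, ← hyy, hry]
          omega
    constructor
    · show ((CE q N L j ++ _).map Prod.fst).Pairwise (· < ·)
      rw [List.map_append]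
      apply List.pairwise_append.2
      refine ⟨hso, hauxs _ hso, ?_⟩
      · intro x hx y hy
        obtain ⟨x', hx', hxx⟩ := List.mem_map.1 hx
        obtain ⟨y', hy', hyy⟩ := List.mem_map.1 hy
        obtain ⟨r, hr, hry⟩ := pvNewMemCE q N L j _ y' hy'
        have := hbd x' hx'
        rw [← hxx, ← hyy, hry]
        omega
    · intro e he
      rcases List.mem_append.1 he with h | h
      · have h1 := hbd e h
        have h2 : (2:Nat)^j ≤ 2^(j+1) := Nat.pow_le_pow_right (by omega) (by omega)
        omega
      · obtain ⟨r, hr, hre⟩ := pvNewMemCE q N L j _ e h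
        have := hbd r hr
        rw [hre]
        have h2 : (2:Nat)^(j+1) = 2^j + 2^j := by rw [pow_succ]; omega
        omega

-- ---------- linking the ports to the ghost structures ----------

def pvAllistOf (X : List Int) (q : Int) : List Int := (List.replicate q.toNat X).flatten

def pvConv : (Nat × Nat × List Int) → (List Int × Int) := fun e => (e.2.2.reverse, (e.2.1 : Int) - 1)

def pvKey (L : List Int) (c : List Int) : Nat := ((canEmb L c.reverse).map Prod.fst).getD 0

theorem pvInnerAppend (X : List Int) : ∀ (al : List Int),
    X.foldl (fun al e => al ++ [e]) al = al ++ X := by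
  induction X with
  | nil => intro al; simp
  | cons x t ih => intro al; simp only [List.foldl_cons]; rw [ih]; simp

theorem pvAllistAux (X : List Int) : ∀ (r : List Int) (acc : List Int),
    r.foldl (fun al _i => X.foldl (fun al e => al ++ [e]) al) acc
      = acc ++ (List.replicate r.length X).flatten := by
  intro r
  induction r with
  | nil => intro acc; simp
  | cons i t ih =>
    intro acc
    simp only [List.foldl_cons]
    rw [pvInnerAppend, ih]
    simp [List.replicate_succ]

theorem pvAllist (X : List Int) (q : Int) :
    (PySem.List.pyRange 0 q 1).foldl (fun al _i => X.foldl (fun al e => al ++ [e]) al) []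
      = pvAllistOf X q := by
  rw [pvAllistAux]
  simp [pvAllistOf, PySem.List.length_pyRange_one]

theorem pvOptionsFoldAux (N : Int) : ∀ (l : List (List Int)) (s : List (List Int)),
    (s ++ l).Nodup →
    l.foldl (fun opts c => if c.sum = N then PySem.Set.add opts c else opts) s
      = s ++ l.filter (fun c => decide (c.sum = N)) := by
  intro l
  induction l with
  | nil => intro s _; simp
  | cons c t ih =>
    intro s hnd
    have hcs : c ∉ s := by
      intro hc
      have := List.disjoint_of_nodup_append hnd
      exact this hc (by simp)
    simp only [List.foldl_cons, List.filter_cons]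
    by_cases hc : c.sum = N
    · rw [if_pos hc, pvAddNotMem s c hcs, ih (s ++ [c]) (by
        have : s ++ c :: t = (s ++ [c]) ++ t := by simp
        rw [← this]; exact hnd)]
      simp [hc]
    · rw [if_neg hc, ih s (by
        have hsub : (s ++ t).Sublist (s ++ c :: t) :=
          List.Sublist.append_left (List.sublist_cons_self c t) s
        exact hsub.nodup hnd)]
      simp [hc]

theorem pvPortA (X : List Int) (N mn : Int)
    (hmn : PySem.List.min? X (fun x => x) = some mn) :
    all_combs X N = (PySem.Set.ofList
        (combsA (PySem.Int.floordiv N mn) N (pvAllistOf X (PySem.Int.floordiv N mn)))).filter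
        (fun c => decide (c.sum = N)) := by
  have h1 : all_combs X N = (PySem.Set.ofList
      (combsA (PySem.Int.floordiv N mn) N
        ((PySem.List.pyRange 0 (PySem.Int.floordiv N mn) 1).foldl
          (fun al _i => X.foldl (fun al e => al ++ [e]) al) []))).foldl
      (fun options comb => if comb.sum = N then PySem.Set.add options comb else options)
      PySem.Set.empty := by
    unfold all_combs
    rw [hmn]
  rw [h1, pvAllist]
  have := pvOptionsFoldAux N (PySem.Set.ofList
      (combsA (PySem.Int.floordiv N mn) N (pvAllistOf X (PySem.Int.floordiv N mn)))) [] (by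
    simpa using PySem.Set.nodup_ofList _)
  simpa [PySem.Set.empty] using this

theorem pvFlatMapIfSingleton {α β : Type} (P : α → Prop) [DecidablePred P] (g : α → β) :
    ∀ (l : List α), l.flatMap (fun e => if P e then [g e] else [])
      = (l.filter (fun e => decide (P e))).map g := by
  intro l
  induction l with
  | nil => simp
  | cons c t ih =>
    simp only [List.flatMap_cons, List.filter_cons]
    by_cases hc : P c
    · rw [if_pos hc]; simp [hc, ih]
    · rw [if_neg hc]; simp [hc, ih]

theorem pvBState (N q : Int) (L : List Int) :
    ∀ (jn : Nat), jn ≤ L.length →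
    (PySem.List.pyRange 0 ((jn : Nat) : Int) 1).foldl
      (fun entries j =>
        let v := PySem.List.pyGetD L j 0
        entries ++ (entries.filter (fun (p : List Int × Int) =>
            decide ((p.1.length : Int) < q ∧ p.1.sum ≤ N) &&
            !((PySem.List.slice L (some (p.2 + 1)) (some j)).contains v))).map
          (fun p => (v :: p.1, j)))
      [(([] : List Int), (-1 : Int))]
    = (CE q N L jn).map pvConv := by
  intro jn
  induction jn with
  | zero =>
    intro _
    rw [PySem.List.pyRange_one_eq_nil (by simp)]
    simp [CE, pvConv]
  | succ jn ih =>
    intro hjn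
    have hsplit : PySem.List.pyRange 0 (((jn+1 : Nat)) : Int) 1
        = PySem.List.pyRange 0 ((jn : Nat) : Int) 1 ++ [((jn : Nat) : Int)] := by
      have h1 : (((jn+1 : Nat)) : Int) = ((jn : Nat) : Int) + 1 := by push_cast; ring
      rw [h1, PySem.List.pyRange_one_succ_right (by positivity)]
    rw [hsplit, List.foldl_append, ih (by omega)]
    simp only [List.foldl_cons, List.foldl_nil]
    have hv : PySem.List.pyGetD L ((jn : Nat) : Int) 0 = L.getD jn 0 := by
      rw [PySem.List.pyGetD_natCast]
    rw [hv]
    rw [show CE q N L (jn+1) = CEstep q N L jn (CE q N L jn) from rfl]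
    unfold CEstep
    rw [List.map_append]
    congr 1
    rw [pvFlatMapIfSingleton
      (P := fun e : Nat × Nat × List Int => pvCond q N e.2.2 ∧ L.getD jn 0 ∉ (L.take jn).drop e.2.1)
      (g := fun e : Nat × Nat × List Int => (e.1 + 2^jn, (jn+1, e.2.2 ++ [L.getD jn 0])))]
    rw [pvFilterOfMap, List.map_map, List.map_map]
    have hfil : (CE q N L jn).filter (fun e =>
        decide (((pvConv e).1.length : Int) < q ∧ (pvConv e).1.sum ≤ N) &&
        !((PySem.List.slice L (some ((pvConv e).2 + 1)) (some ((jn : Nat) : Int))).contains (L.getD jn 0)))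
        = (CE q N L jn).filter
          (fun e => decide (pvCond q N e.2.2 ∧ L.getD jn 0 ∉ (L.take jn).drop e.2.1)) := by
      apply List.filter_congr
      rintro ⟨u, n, d⟩ _
      unfold pvConv
      simp only []
      have hslice : PySem.List.slice L (some (((n : Nat) : Int) - 1 + 1)) (some ((jn : Nat) : Int))
          = (L.take jn).drop n := by
        rw [show (((n : Nat) : Int) - 1 + 1) = ((n : Nat) : Int) by ring]
        rw [PySem.List.slice_natCast]
        rw [List.drop_take]
      rw [hslice]
      simp only [List.length_reverse, List.sum_reverse, List.contains_eq_mem, pvCond]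
      by_cases h1 : (d.length : Int) < q ∧ d.sum ≤ N <;>
        by_cases h2 : L.getD jn 0 ∈ (L.take jn).drop n <;>
          simp [h1, h2]
    rw [hfil]
    apply List.map_congr_left
    rintro ⟨u, n, d⟩ _
    simp only [Function.comp, pvConv, List.reverse_append, List.reverse_cons, List.reverse_nil,
      List.nil_append, List.cons_append, List.singleton_append, Prod.mk.injEq]
    constructor <;> first | trivial | (push_cast; ring)

-- B's port, rewritten through the CE structure (valid for every case)
theorem pvPortB (X : List Int) (N mn : Int)
    (hmn : PySem.List.min? X (fun x => x) = some mn) :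
    all_combs_alt X N = PySem.Set.ofList
      ((((CE (PySem.Int.floordiv N mn) N (pvAllistOf X (PySem.Int.floordiv N mn))
            (pvAllistOf X (PySem.Int.floordiv N mn)).length).map pvConv).filter
        (fun p => decide (p.1.sum = N))).map (fun p => p.1)) := by
  have h1 : all_combs_alt X N = PySem.Set.ofList
      ((((PySem.List.pyRange 0 (((pvAllistOf X (PySem.Int.floordiv N mn)).length : Nat) : Int) 1).foldl
        (fun entries j =>
          let v := PySem.List.pyGetD (pvAllistOf X (PySem.Int.floordiv N mn)) j 0
          entries ++ (entries.filter (fun (p : List Int × Int) =>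
              decide ((p.1.length : Int) < PySem.Int.floordiv N mn ∧ p.1.sum ≤ N) &&
              !((PySem.List.slice (pvAllistOf X (PySem.Int.floordiv N mn)) (some (p.2 + 1)) (some j)).contains v))).map
            (fun p => (v :: p.1, j)))
        [(([] : List Int), (-1 : Int))]).filter
          (fun p => decide (p.1.sum = N))).map (fun p => p.1)) := by
    unfold all_combs_alt
    rw [hmn]
    rfl
  rw [h1]
  rw [pvBState N (PySem.Int.floordiv N mn) (pvAllistOf X (PySem.Int.floordiv N mn)) _ le_rfl]

-- ---------- the degenerate cases ----------

theorem pvCombsNeg (q N : Int) (hN : N < 0) : ∀ (a : List Int), a ≠ [] → combsA q N a = [] := by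
  intro a
  induction a with
  | nil => intro h; exact absurd rfl h
  | cons h tl ih =>
    intro _
    rw [show combsA q N (h :: tl) = (combsA q N tl).foldl
      (fun cs c => if (c.length : Int) < q ∧ c.sum ≤ N then cs ++ [c, c ++ [h]] else cs) [] from rfl]
    cases tl with
    | nil =>
      show List.foldl _ [] [[]] = []
      simp only [List.foldl_cons, List.foldl_nil]
      rw [if_neg (by simp; omega)]
    | cons h2 tl2 =>
      rw [ih (by simp)]
      simp

-- with a negative target no entry can ever be extended
theorem pvCEstuck (q N : Int) (L : List Int) (hN : N < 0) :
    ∀ j, CE q N L j = [(0, (0, ([] : List Int)))] := by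
  intro j
  induction j with
  | zero => rfl
  | succ j ih =>
    rw [show CE q N L (j+1) = CEstep q N L j (CE q N L j) from rfl, ih]
    unfold CEstep
    simp only [List.flatMap_cons, List.flatMap_nil]
    rw [if_neg (fun hc => by have := hc.1.2; simp at this; omega)]
    simp

theorem pvCase1 (X : List Int) (N mn : Int)
    (hmn : PySem.List.min? X (fun x => x) = some mn)
    (hq : PySem.Int.floordiv N mn ≤ 0) :
    all_combs X N = all_combs_alt X N := by
  have ht0 : (PySem.Int.floordiv N mn).toNat = 0 := by omega
  have hA : pvAllistOf X (PySem.Int.floordiv N mn) = [] := by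
    unfold pvAllistOf; rw [ht0]; simp
  rw [pvPortA X N mn hmn, hA, pvPortB X N mn hmn, hA]
  rw [show combsA (PySem.Int.floordiv N mn) N [] = [[]] from rfl]
  rw [pvOfListId [[]] (by simp)]
  simp only [List.length_nil]
  rw [show CE (PySem.Int.floordiv N mn) N [] 0 = [(0, (0, ([] : List Int)))] from rfl]
  simp only [List.map_cons, List.map_nil]
  by_cases hN : (0 : Int) = N
  · subst hN
    rfl
  · have hd : (decide (([] : List Int).sum = N)) = false := by
      simp only [List.sum_nil]
      exact decide_eq_false hN
    have hd' : (decide ((pvConv (0, (0, ([] : List Int)))).1.sum = N)) = false := by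
      simp only [pvConv, List.reverse_nil]
      exact hd
    simp only [List.filter_cons, List.filter_nil, hd, hd']
    rfl

theorem pvCase2 (X : List Int) (N mn : Int)
    (hmn : PySem.List.min? X (fun x => x) = some mn)
    (hmneg : mn < 0) (hq : 0 < PySem.Int.floordiv N mn) :
    all_combs X N = all_combs_alt X N := by
  have hX : X ≠ [] := by
    intro h
    rw [h] at hmn
    rw [(PySem.List.min?_eq_none_iff ([] : List Int) (fun x => x)).2 rfl] at hmn
    simp at hmn
  have hNneg : N < 0 := by
    have hdm := PySem.Int.floordiv_mul_add_mod N mn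
    have hb := PySem.Int.mod_neg_bounds N hmneg
    nlinarith [hq]
  have hAne : pvAllistOf X (PySem.Int.floordiv N mn) ≠ [] := by
    unfold pvAllistOf
    have ht : 0 < (PySem.Int.floordiv N mn).toNat := by omega
    intro h
    have hlen := pvFlattenLen X (PySem.Int.floordiv N mn).toNat
    rw [h] at hlen
    have hk : 0 < X.length := List.length_pos_iff.2 hX
    simp at hlen
    rcases hlen with h1 | h1
    · omega
    · rw [h1] at hk; simp at hk
  rw [pvPortA X N mn hmn, pvCombsNeg _ N hNneg _ hAne]
  rw [pvPortB X N mn hmn, pvCEstuck _ _ _ hNneg]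
  simp only [List.map_cons, List.map_nil]
  have hRHS : ([pvConv (0, (0, ([] : List Int)))].filter (fun p => decide (p.1.sum = N))) = [] := by
    simp only [List.filter_cons, List.filter_nil, pvConv, List.reverse_nil, List.sum_nil]
    rw [if_neg (by simp; omega)]
  rw [hRHS]
  simp [PySem.Set.ofList]

-- ---------- the main case: positive steps ----------

-- membership of the two port outputs, in the positive-step main case
theorem pvMems (X : List Int) (N mn q : Int)
    (hmnpos : 0 < mn) (hposX : ∀ v ∈ X, mn ≤ v) (hX : X ≠ [])
    (hq : 0 < q) (hN0 : 0 < N)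
    (hfdiv : ∀ z : Int, z * mn ≤ N → z ≤ q) :
    (∀ c, (c ∈ (PySem.Set.ofList ((combsR q N ((List.replicate q.toNat X).flatten)).map
        (fun p => p.2.reverse))).filter (fun c => decide (c.sum = N)) ↔
      (c.sum = N ∧ (∀ v ∈ c, v ∈ X) ∧
        ((c.length : Int) < q ∨ c = [] ∨ c.reverse.getD 0 0 = X.getD 0 0)))) ∧
    (∀ c, (c ∈ (((CE q N ((List.replicate q.toNat X).flatten)
          ((List.replicate q.toNat X).flatten).length).map pvConv).filter
        (fun p => decide (p.1.sum = N))).map (fun p => p.1) ↔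
      (c.sum = N ∧ ∀ v ∈ c, v ∈ X))) := by
  have hk : 0 < X.length := List.length_pos_iff.2 hX
  have hvpos : ∀ v ∈ X, 0 < v := fun v hv => lt_of_lt_of_le hmnpos (hposX v hv)
  set t : Nat := q.toNat with htdef
  have htq : (t : Int) = q := Int.toNat_of_nonneg (le_of_lt hq)
  have ht0 : 0 < t := by omega
  set L : List Int := (List.replicate t X).flatten with hLdef
  have hLvals : ∀ v ∈ L, v ∈ X := pvMemFlatten X t
  have hLne : L ≠ [] := by
    intro h
    have hlen : L.length = t * X.length := pvFlattenLen X t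
    rw [h] at hlen
    simp at hlen
    rcases hlen with h1 | h1
    · omega
    · exact absurd h1 hX
  have hLcons : ∃ L₁, L = X.getD 0 0 :: L₁ ∧ ((List.replicate (t-1) X).flatten).Sublist L₁ := by
    cases X with
    | nil => exact absurd rfl hX
    | cons x₀ X' =>
      refine ⟨X' ++ (List.replicate (t-1) (x₀ :: X')).flatten, ?_, List.sublist_append_right X' _⟩
      rw [hLdef]
      have ht1 : t = (t - 1) + 1 := by omega
      rw [ht1, List.replicate_succ, List.flatten_cons]
      simp
  have hSufPref : ∀ (d : List Int), (∀ v ∈ d, v ∈ X) → d.sum = N →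
      SufOK q N d ∧ PrefOK q N d ∧ (d.length : Int) ≤ q := by
    intro d hv hs
    have hlenq : (d.length : Int) ≤ q := by
      apply hfdiv
      rw [← hs]
      exact pvSumGe mn d (fun v hvd => hposX v (hv v hvd))
    have hcondSub : ∀ s, s.Sublist d → s.length < d.length → pvCond q N s := by
      intro s hsub hsl
      constructor
      · have : (s.length : Int) < (d.length : Int) := by exact_mod_cast hsl
        omega
      · calc s.sum ≤ d.sum := pvSumSublistLe hsub (fun v hvd => le_of_lt (hvpos v (hv v hvd)))
          _ ≤ N := le_of_eq hs
    exact ⟨pvSufOf q N d hcondSub, pvPrefOf q N d hcondSub, hlenq⟩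
  have hEmbEx : ∀ (d : List Int), (∀ v ∈ d, v ∈ X) → (d.length : Int) ≤ q → ∃ u, EmbR L d u := by
    intro d hv hl
    apply (pvEmbSub L d).2
    apply pvSubl X t d hv
    omega
  have hCE : ∀ (u n : Nat) (d : List Int),
      ((u, (n, d)) ∈ CE q N L L.length ↔ (canEmb L d = some (u, n) ∧ PrefOK q N d)) := by
    intro u n d
    rw [pvMemCE q N L L.length le_rfl u n d, List.take_length]
  constructor
  · intro c
    rw [List.mem_filter]
    rw [PySem.Set.mem_ofList]
    simp only [List.mem_map, decide_eq_true_eq]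
    constructor
    · rintro ⟨⟨⟨u, d⟩, hmem, hrev⟩, hsum⟩
      obtain ⟨hE, hS, hthird⟩ := (pvMemCombsR q N L u d).1 hmem
      have hdc : d = c.reverse := by rw [← hrev]; simp
      subst hdc
      refine ⟨hsum, ?_, ?_⟩
      · intro v hv
        have hsubl : (c.reverse).Sublist L := (pvEmbSub L c.reverse).1 ⟨u, hE⟩
        exact hLvals v (hsubl.subset (by simpa using hv))
      · rcases hthird with hodd | hcond | habs
        · obtain ⟨L₁, hL1, _⟩ := hLcons
          rw [hL1] at hE
          obtain ⟨d', hd'⟩ := pvEmbOddHead _ _ _ _ hE hodd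
          rw [hd']
          simp
        · exact Or.inl (by simpa using hcond.1)
        · exact absurd habs hLne
    · rintro ⟨hsum, hvals, hthird⟩
      have hvals' : ∀ v ∈ c.reverse, v ∈ X := fun v hv => hvals v (by simpa using hv)
      have hsum' : c.reverse.sum = N := by simpa using hsum
      obtain ⟨hSuf, hPref, hlenle⟩ := hSufPref c.reverse hvals' hsum'
      refine ⟨?_, hsum⟩
      by_cases hlt : (c.length : Int) < q
      · obtain ⟨u, hE⟩ := hEmbEx c.reverse hvals' (by simpa using hlenle)
        refine ⟨(u, c.reverse), (pvMemCombsR q N L u c.reverse).2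
          ⟨hE, hSuf, Or.inr (Or.inl ⟨by simpa using hlt, by rw [hsum']⟩)⟩, by simp⟩
      · by_cases hc0 : c = []
        · subst hc0
          refine ⟨(0, []), (pvMemCombsR q N L 0 []).2
            ⟨(pvEmbNil L 0).2 rfl, trivial, Or.inr (Or.inl ⟨by simpa using hq, by simp; omega⟩)⟩, by simp⟩
        · have hlast : c.reverse.getD 0 0 = X.getD 0 0 := by
            rcases hthird with h | h | h
            · exact absurd h hlt
            · exact absurd h hc0
            · exact h
          obtain ⟨w, d', hd⟩ : ∃ w d', c.reverse = w :: d' := by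
            cases hcr : c.reverse with
            | nil => exact absurd (by simpa using congrArg List.reverse hcr) hc0
            | cons w d' => exact ⟨w, d', rfl⟩
          have hw : w = X.getD 0 0 := by
            rw [hd] at hlast
            simpa using hlast
          obtain ⟨L₁, hL1, hL1sub⟩ := hLcons
          have hd'len : (d'.length : Int) ≤ (t : Int) - 1 := by
            have : c.reverse.length = d'.length + 1 := by rw [hd]; simp
            have hcl : (c.reverse.length : Int) ≤ q := by simpa using hlenle
            rw [this] at hcl
            push_cast at hcl
            omega
          have hd'sub : d'.Sublist L₁ := by
            apply List.Sublist.trans _ hL1sub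
            apply pvSubl X (t-1) d'
            · intro v hv
              exact hvals' v (by rw [hd]; exact List.mem_cons_of_mem _ hv)
            · have : ((t - 1 : Nat) : Int) = (t : Int) - 1 := by push_cast [Nat.cast_sub (by omega : 1 ≤ t)]; ring
              omega
          obtain ⟨u', hE'⟩ := (pvEmbSub L₁ d').2 hd'sub
          have hE : EmbR L c.reverse (2*u'+1) := by
            rw [hL1, hd]
            show (∃ u'', 2*u'+1 = 2*u'' ∧ EmbR L₁ (w :: d') u'') ∨
              (∃ u'' d'', 2*u'+1 = 2*u''+1 ∧ w :: d' = X.getD 0 0 :: d'' ∧ EmbR L₁ d'' u'')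
            exact Or.inr ⟨u', d', rfl, by rw [hw], hE'⟩
          refine ⟨(2*u'+1, c.reverse), (pvMemCombsR q N L (2*u'+1) c.reverse).2
            ⟨hE, hSuf, Or.inl (by omega)⟩, by simp⟩
  · intro c
    rw [show (((CE q N L L.length).map pvConv).filter (fun p => decide (p.1.sum = N))).map
          (fun p => p.1)
        = ((CE q N L L.length).filter (fun x => decide ((pvConv x).1.sum = N))).map
          (fun e => e.2.2.reverse) from by rw [pvFilterOfMap, List.map_map]; rfl]
    simp only [List.mem_map, List.mem_filter, decide_eq_true_eq]
    constructor
    · rintro ⟨⟨u', n, d⟩, ⟨hce, hsumd⟩, hrev⟩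
      obtain ⟨hcan, hpref⟩ := (hCE u' n d).1 hce
      have hdc : d = c.reverse := by rw [← hrev]; simp
      subst hdc
      have hsum : c.sum = N := by
        have : (pvConv (u', (n, c.reverse))).1 = c := by simp [pvConv]
        rw [this] at hsumd
        exact hsumd
      refine ⟨hsum, ?_⟩
      intro v hv
      have hE := pvCanSound L c.reverse u' n hcan
      have hsubl : (c.reverse).Sublist L := (pvEmbSub L c.reverse).1 ⟨u', hE⟩
      exact hLvals v (hsubl.subset (by simpa using hv))
    · rintro ⟨hsum, hvals⟩
      have hvals' : ∀ v ∈ c.reverse, v ∈ X := fun v hv => hvals v (by simpa using hv)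
      have hsum' : c.reverse.sum = N := by simpa using hsum
      obtain ⟨hSuf, hPref, hlenle⟩ := hSufPref c.reverse hvals' hsum'
      obtain ⟨u, hE⟩ := hEmbEx c.reverse hvals' (by simpa using hlenle)
      obtain ⟨⟨u₀, n₀⟩, hcan, _⟩ := pvCanMin L c.reverse u hE
      refine ⟨(u₀, (n₀, c.reverse)), ⟨(hCE u₀ n₀ c.reverse).2 ⟨hcan, hPref⟩, ?_⟩, by simp⟩
      show (pvConv (u₀, (n₀, c.reverse))).1.sum = N
      simp only [pvConv, List.reverse_reverse]
      exact hsum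

theorem pvCase3Core (X : List Int) (N mn q : Int)
    (hmnpos : 0 < mn) (hposX : ∀ v ∈ X, mn ≤ v) (hX : X ≠ [])
    (hq : 0 < q) (hN0 : 0 < N)
    (hfdiv : ∀ z : Int, z * mn ≤ N → z ≤ q)
    (hND : ∀ d : List Int, d.length = q.toNat → (∀ v ∈ d, v ∈ X) → d.sum = N → d ≠ [] →
      d.getLast? = X.head?) :
    (PySem.Set.ofList ((combsR q N ((List.replicate q.toNat X).flatten)).map
        (fun p => p.2.reverse))).filter (fun c => decide (c.sum = N))
    = PySem.Set.ofList ((((CE q N ((List.replicate q.toNat X).flatten)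
          ((List.replicate q.toNat X).flatten).length).map pvConv).filter
        (fun p => decide (p.1.sum = N))).map (fun p => p.1)) := by
  have hk : 0 < X.length := List.length_pos_iff.2 hX
  have hvpos : ∀ v ∈ X, 0 < v := fun v hv => lt_of_lt_of_le hmnpos (hposX v hv)
  set t : Nat := q.toNat with htdef
  have htq : (t : Int) = q := Int.toNat_of_nonneg (le_of_lt hq)
  have ht0 : 0 < t := by omega
  set L : List Int := (List.replicate t X).flatten with hLdef
  have hLvals : ∀ v ∈ L, v ∈ X := pvMemFlatten X t
  have hLne : L ≠ [] := by
    intro h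
    have hlen : L.length = t * X.length := pvFlattenLen X t
    rw [h] at hlen
    simp at hlen
    rcases hlen with h1 | h1
    · omega
    · exact absurd h1 hX
  have hLcons : ∃ L₁, L = X.getD 0 0 :: L₁ ∧ ((List.replicate (t-1) X).flatten).Sublist L₁ := by
    cases X with
    | nil => exact absurd rfl hX
    | cons x₀ X' =>
      refine ⟨X' ++ (List.replicate (t-1) (x₀ :: X')).flatten, ?_, List.sublist_append_right X' _⟩
      rw [hLdef]
      have ht1 : t = (t - 1) + 1 := by omega
      rw [ht1, List.replicate_succ, List.flatten_cons]
      simp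
  -- length / admissibility facts for sequences over X
  have hSufPref : ∀ (d : List Int), (∀ v ∈ d, v ∈ X) → d.sum = N →
      SufOK q N d ∧ PrefOK q N d ∧ (d.length : Int) ≤ q := by
    intro d hv hs
    have hlenq : (d.length : Int) ≤ q := by
      apply hfdiv
      rw [← hs]
      exact pvSumGe mn d (fun v hvd => hposX v (hv v hvd))
    have hcondSub : ∀ s, s.Sublist d → s.length < d.length → pvCond q N s := by
      intro s hsub hsl
      constructor
      · have : (s.length : Int) < (d.length : Int) := by exact_mod_cast hsl
        omega
      · calc s.sum ≤ d.sum := pvSumSublistLe hsub (fun v hvd => le_of_lt (hvpos v (hv v hvd)))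
          _ ≤ N := le_of_eq hs
    exact ⟨pvSufOf q N d hcondSub, pvPrefOf q N d hcondSub, hlenq⟩
  have hEmbEx : ∀ (d : List Int), (∀ v ∈ d, v ∈ X) → (d.length : Int) ≤ q → ∃ u, EmbR L d u := by
    intro d hv hl
    apply (pvEmbSub L d).2
    apply pvSubl X t d hv
    omega
  have hCE : ∀ (u n : Nat) (d : List Int),
      ((u, (n, d)) ∈ CE q N L L.length ↔ (canEmb L d = some (u, n) ∧ PrefOK q N d)) := by
    intro u n d
    rw [pvMemCE q N L L.length le_rfl u n d, List.take_length]
  -- A's characterisation and the bare composition property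
  set OUT : List Int → Prop := fun c => c.sum = N ∧ (∀ v ∈ c, v ∈ X) ∧
      ((c.length : Int) < q ∨ c = [] ∨ c.reverse.getD 0 0 = X.getD 0 0) with hOUT
  set OUTB : List Int → Prop := fun c => c.sum = N ∧ (∀ v ∈ c, v ∈ X) with hOUTB
  -- outside D_ the two coincide
  have hOUTiff : ∀ c, OUT c ↔ OUTB c := by
    intro c
    constructor
    · rintro ⟨h1, h2, _⟩; exact ⟨h1, h2⟩
    · rintro ⟨hsum, hvals⟩
      refine ⟨hsum, hvals, ?_⟩
      have hvals' : ∀ v ∈ c.reverse, v ∈ X := fun v hv => hvals v (by simpa using hv)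
      have hsum' : c.reverse.sum = N := by simpa using hsum
      have hlenle : (c.length : Int) ≤ q := by
        have := (hSufPref c.reverse hvals' hsum').2.2
        simpa using this
      by_cases hlt : (c.length : Int) < q
      · exact Or.inl hlt
      · by_cases hc0 : c = []
        · exact Or.inr (Or.inl hc0)
        · right; right
          have hlen : c.length = q.toNat := by omega
          have hlast := hND c hlen hvals hsum hc0
          obtain ⟨w, r, hrev⟩ : ∃ w r, c.reverse = w :: r := by
            cases h : c.reverse with
            | nil => exact absurd (by simpa using congrArg List.reverse h) hc0
            | cons w r => exact ⟨w, r, rfl⟩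
          have hw : c.getLast? = some w := by
            rw [← List.head?_reverse, hrev]; rfl
          obtain ⟨x₀, X', hX0⟩ : ∃ x₀ X', X = x₀ :: X' := by
            cases X with
            | nil => exact absurd rfl hX
            | cons x₀ X' => exact ⟨x₀, X', rfl⟩
          rw [hX0] at hlast
          rw [hw] at hlast
          have hwx : w = x₀ := by
            have := hlast
            simp at this
            exact this
          rw [hrev, hX0, hwx]
          simp
  obtain ⟨hmemA, hmemB0⟩ := pvMems X N mn q hmnpos hposX hX hq hN0 hfdiv
  -- ===== B's list as a plain list DL =====
  set DL : List (List Int) := (((CE q N L L.length).map pvConv).filter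
      (fun p => decide (p.1.sum = N))).map (fun p => p.1) with hDL
  have hDLmap : DL = ((CE q N L L.length).filter
      (fun x => decide ((pvConv x).1.sum = N))).map (fun e => e.2.2.reverse) := by
    rw [hDL, pvFilterOfMap, List.map_map]
    rfl
  have hmemB : ∀ c, (c ∈ DL ↔ c.sum = N ∧ ∀ v ∈ c, v ∈ X) := fun c => hmemB0 c
  -- ===== keys: both lists are strictly sorted by the canonical code =====
  have hkeyCE : ∀ e ∈ CE q N L L.length, pvKey L (e.2.2.reverse) = e.1 := by
    rintro ⟨u, n, d⟩ he
    obtain ⟨hcan, _⟩ := (hCE u n d).1 he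
    unfold pvKey
    simp only [List.reverse_reverse]
    rw [hcan]
    rfl
  have hBpw : DL.Pairwise (fun x y => pvKey L x < pvKey L y) := by
    rw [hDLmap]
    rw [List.pairwise_map]
    have h1 : (CE q N L L.length).Pairwise (fun a b => a.1 < b.1) :=
      List.pairwise_map.1 (pvSortedCE q N L L.length).1
    have h2 := h1.filter (fun x => decide ((pvConv x).1.sum = N))
    apply h2.imp_of_mem
    intro a b ha hb hab
    have hfa := List.mem_of_mem_filter ha
    have hfb := List.mem_of_mem_filter hb
    rw [hkeyCE a hfa, hkeyCE b hfb]
    exact hab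
  have hBnodup : DL.Nodup := by
    apply hBpw.imp
    intro a b h
    intro he
    rw [he] at h
    omega
  rw [pvOfListId DL hBnodup]
  -- A side pairwise via the minimal-code dedup lemma
  have hApw : ((PySem.Set.ofList ((combsR q N L).map (fun p => p.2.reverse))).filter
      (fun c => decide (c.sum = N))).Pairwise (fun x y => pvKey L x < pvKey L y) := by
    apply List.Pairwise.filter
    have hmm : (combsR q N L).map (fun p => p.2.reverse)
        = ((combsR q N L).map (fun p => (p.1, p.2.reverse))).map Prod.snd := by
      rw [List.map_map]
      rfl
    rw [hmm]
    apply pvOfKey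
    · rw [List.map_map]
      exact pvSortedCombsR q N L
    · rintro ⟨u, c⟩ hp
      obtain ⟨⟨u', d⟩, hmem, heq⟩ := List.mem_map.1 hp
      obtain ⟨h1, h2⟩ : u' = u ∧ d.reverse = c := by
        constructor <;> [exact congrArg Prod.fst heq; exact congrArg Prod.snd heq]
      rw [h1] at hmem
      obtain ⟨hE, _, _⟩ := (pvMemCombsR q N L u d).1 hmem
      obtain ⟨⟨w, m⟩, hcan, hle⟩ := pvCanMin L d u hE
      have : pvKey L c = w := by
        unfold pvKey
        rw [← h2]
        simp only [List.reverse_reverse]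
        rw [hcan]
        rfl
      simp only [this]
      exact hle
    · rintro ⟨u, c⟩ hp
      obtain ⟨⟨u', d⟩, hmem, heq⟩ := List.mem_map.1 hp
      obtain ⟨h1, h2⟩ : u' = u ∧ d.reverse = c := by
        constructor <;> [exact congrArg Prod.fst heq; exact congrArg Prod.snd heq]
      rw [h1] at hmem
      obtain ⟨hE, hS, hthird⟩ := (pvMemCombsR q N L u d).1 hmem
      obtain ⟨⟨w, m⟩, hcan, hle⟩ := pvCanMin L d u hE
      have hkey : pvKey L c = w := by
        unfold pvKey
        rw [← h2]
        simp only [List.reverse_reverse]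
        rw [hcan]
        rfl
      have hthird' : w % 2 = 1 ∨ pvCond q N d ∨ L = [] := by
        rcases hthird with hodd | hcond | habs
        · left
          obtain ⟨L₁, hL1, _⟩ := hLcons
          rw [hL1] at hE hcan
          obtain ⟨d', hd'⟩ := pvEmbOddHead _ _ _ _ hE hodd
          rw [hd'] at hcan
          rw [show canEmb (X.getD 0 0 :: L₁) (X.getD 0 0 :: d')
              = (canEmb L₁ d').map (fun p => (2*p.1+1, p.2+1)) by simp [canEmb]] at hcan
          obtain ⟨⟨w', m'⟩, _, hmap⟩ := Option.map_eq_some_iff.1 hcan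
          injection hmap with hm1 hm2
          omega
        · exact Or.inr (Or.inl hcond)
        · exact Or.inr (Or.inr habs)
      refine ⟨(w, c), List.mem_map.2 ⟨(w, d), (pvMemCombsR q N L w d).2
        ⟨pvCanSound L d w m hcan, hS, hthird'⟩, by rw [← h2]⟩, rfl, hkey.symm⟩
  -- ===== conclude: same members, same strict key order =====
  exact pvKeyext (pvKey L) _ _ hApw hBpw
    (fun c => ((hmemA c).trans (hOUTiff c)).trans (hmemB c).symm)

theorem pvCase3 (X : List Int) (N mn : Int)
    (hmn : PySem.List.min? X (fun x => x) = some mn)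
    (hmnpos : 0 < mn) (hq : 0 < PySem.Int.floordiv N mn)
    (hD : ¬ D_all_combs X N) :
    all_combs X N = all_combs_alt X N := by
  have hX : X ≠ [] := by
    intro h
    rw [h, (PySem.List.min?_eq_none_iff ([] : List Int) (fun x => x)).2 rfl] at hmn
    simp at hmn
  have hposX : ∀ v ∈ X, mn ≤ v := fun v hv => PySem.List.min?_isMin hmn v hv
  have hN : mn ≤ N := by
    have h1 : (1 : Int) * mn ≤ N := (PySem.Int.le_floordiv_iff_mul_le hmnpos).1 (by omega)
    omega
  have hN0 : 0 < N := lt_of_lt_of_le hmnpos hN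
  have hND : ∀ d : List Int, d.length = (PySem.Int.floordiv N mn).toNat → (∀ v ∈ d, v ∈ X) →
      d.sum = N → d ≠ [] → d.getLast? = X.head? := by
    intro d hlen hvals hsum _hne
    by_contra hlast
    apply hD
    have hql : ((PySem.Int.floordiv N mn).toNat : Int) = PySem.Int.floordiv N mn :=
      Int.toNat_of_nonneg (by omega)
    exact ⟨mn, Option.mem_def.2 hmn, hmnpos, hN, d, hvals, by rw [hlen]; exact hql, hsum, hlast⟩
  rw [pvPortA X N mn hmn, pvCombsEq, pvPortB X N mn hmn]
  exact pvCase3Core X N mn (PySem.Int.floordiv N mn) hmnpos hposX hX hq hN0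
    (fun z hz => (PySem.Int.le_floordiv_iff_mul_le hmnpos).2 hz) hND

-- ===== VERDICT (by name: the statement is the Claim_ definition above) =====
theorem all_combs_spec : Claim_unchanged_all_combs := by
  unfold Claim_unchanged_all_combs
  intro X N _hdom hpre
  unfold Spec_all_combs
  intro hD
  obtain ⟨hXne, hmn0⟩ := hpre
  obtain ⟨mn, hmn⟩ : ∃ mn, PySem.List.min? X (fun x => x) = some mn := by
    cases h : PySem.List.min? X (fun x => x) with
    | none => exact absurd ((PySem.List.min?_eq_none_iff X (fun x => x)).1 h) hXne
    | some mn => exact ⟨mn, rfl⟩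
  have hmnne : mn ≠ 0 := by
    intro h
    rw [h] at hmn
    exact hmn0 hmn
  by_cases hq : PySem.Int.floordiv N mn ≤ 0
  · exact pvCase1 X N mn hmn hq
  · push_neg at hq
    rcases lt_or_gt_of_ne hmnne with hneg | hpos
    · exact pvCase2 X N mn hmn hneg hq
    · exact pvCase3 X N mn hmn hpos hq hD

theorem all_combs_changed : Claim_changed_all_combs := by
  unfold Claim_changed_all_combs
  refine ⟨by decide, by decide, ?_, by decide, by decide, by decide⟩
  show D_all_combs [2, 1] 2
  exact ⟨1, Option.mem_def.2 (by decide), by decide, by decide, [1, 1],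
    by decide, by decide, by decide, by decide⟩

theorem all_combs_tight : Claim_exact_all_combs := by
  unfold Claim_exact_all_combs
  intro X N _hdom _hpre hd heq
  obtain ⟨m, hmem, hm0, hmN, d, hvals, hlen, hsum, hlast⟩ := hd
  have hmn : PySem.List.min? X (fun x => x) = some m := Option.mem_def.1 hmem
  have hX : X ≠ [] := by
    intro h
    rw [h, (PySem.List.min?_eq_none_iff ([] : List Int) (fun x => x)).2 rfl] at hmn
    simp at hmn
  have hposX : ∀ v ∈ X, m ≤ v := fun v hv => PySem.List.min?_isMin hmn v hv
  have hq : 0 < PySem.Int.floordiv N m := by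
    have h1 : (1 : Int) * m ≤ N := by omega
    have := (PySem.Int.le_floordiv_iff_mul_le hm0).2 h1
    omega
  have hN0 : 0 < N := lt_of_lt_of_le hm0 hmN
  obtain ⟨hmemA, hmemB⟩ := pvMems X N m (PySem.Int.floordiv N m) hm0 hposX hX hq hN0
    (fun z hz => (PySem.Int.le_floordiv_iff_mul_le hm0).2 hz)
  have hne : d ≠ [] := by
    intro h
    rw [h] at hlen
    simp at hlen
    omega
  have hdB : d ∈ all_combs_alt X N := by
    rw [pvPortB X N m hmn]
    exact (PySem.Set.mem_ofList _ _).2 ((hmemB d).2 ⟨hsum, hvals⟩)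
  have hdA : d ∉ all_combs X N := by
    rw [pvPortA X N m hmn, pvCombsEq]
    intro hmemd
    obtain ⟨_, _, hthird⟩ := (hmemA d).1 hmemd
    rcases hthird with h | h | h
    · rw [hlen] at h
      exact absurd h (lt_irrefl _)
    · exact hne h
    · apply hlast
      obtain ⟨y, r0, hdr⟩ : ∃ y r0, d.reverse = y :: r0 := by
        cases hc : d.reverse with
        | nil => exact absurd (by simpa using congrArg List.reverse hc) hne
        | cons y r0 => exact ⟨y, r0, rfl⟩
      obtain ⟨x₀, X', hX0⟩ : ∃ x₀ X', X = x₀ :: X' := by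
        cases X with
        | nil => exact absurd rfl hX
        | cons a b => exact ⟨a, b, rfl⟩
      have hy : y = x₀ := by
        rw [hdr] at h
        rw [hX0] at h
        simpa using h
      have hgl : d.getLast? = some y := by
        rw [← List.head?_reverse, hdr]
        rfl
      rw [hgl, hX0, List.head?_cons, hy]
  rw [heq] at hdA
  exact hdA hdB
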